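/-
  THE WALKER / VERIFICATION-CONDITION GENERATOR of the flat user machine: `u_walk`.

      u_walk code [facts] until [a₁, a₂, …]            options:  span [lo, hi]   side (tac)   noprune

  (`aᵢ`, `lo`, `hi`: numerals, or closed terms of type `Nat` / `Word` that evaluate — the symbolic labels of Vorbis/Labels.lean;
  likewise the entry address of `code`, of a `Calls` / `CheckSpec` hypothesis and the right-hand side of `v.rip = …` may be labels:
  every address the walker reads is EVALUATED, never matched as a numeral.)

  on a goal `ReachVia L μ I v P` (`v` a VARIABLE about which the context says `v.rip = literal`, `v.reg r = e`, …):

    * `code : HasCodeNat L c base N len` — the function's bytes (the number `code_fn.nat` of `#code_bytes`) at the literal address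
      `base` in the memory of some state `c` (the function's entry state, a loop head …), and either `c` is `v` or the context has
      `Mem.EqOn lo hi c.mem v.mem` ("nothing was stored into the code span since"; `span [lo, hi]`, default: the function itself;
      give the span of the WHOLE image's code, and the same fact serves the code of every callee);
    * finds the instruction at `v.rip` in those bytes (`User.codeInsnAt`: the decode facts must exist — imported, or made by
      `#code_sweep code_fn` before the theorem), discharges the invariant of the way `I v` (for `I v := v.rip ≠ REPORT`: a
      comparison of literals), steps the instruction with the stepper's `u_body` (SSE steps, with `UserX.SseStep` imported, are
      just more steps), and
    * FREEZES the state the instruction leaves: a fresh variable `s_<addr>` with the hypotheses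

          w_rip   : s.rip = literal                  w_kept  : RegsKept S v₀ s       (S: the registers written since v₀)
          w_rax   : s.reg .rax = e …  (r ∈ S)        w_mem   : s.mem = (nest of `writeLE` over v₀.mem)
          w_flags : s.flags = f.setStatus (…)        w_eq    : Mem.EqOn lo hi c.mem s.mem
          w_mxcsr : s.mxcsr = w                      w_zmm   : s.zmm = …   (only if the context has `v.zmm = …` at the start)
                                                     (a check call states `w_zmm : s_<addr>r.zmm = s_<addr>.zmm` in any case; in a walk
                                                     that does not track the vector registers it lives until the next SSE write)
          w_has_<addr> : L.Has a k  (one per store: what reading through it later needs)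

      — never one big term; the hypotheses about the previous variable are cleared, so the context is as large after 100
      instructions as after 10 (plus one `writeLE` layer and one `w_has` per store; a store over the last store of the same
      range replaces it; a flag result that defines all six status flags replaces the one before: the flags stay one layer).
      The hypotheses are bound as `have`s that `instantiateMVars` does not reduce (`bindHyps`): the proof term is linear;
    * the rewrite rules of every step are ALL hypotheses `x.reg r = _`, `x.rip = _`, `x.mem.readLE a k = _`,
      `UInt64.ofNat (x.mem.readLE a k) = _` of the context and, for every `RegsKept S a b`, `b.reg r = a.reg r` for the general
      registers outside `S`; plus `facts` (always: `hμ.vendor`);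
    * a LOAD is read through the stores of `w_mem`: the same address and size give the value stored; a store with the same
      base address and a literal offset that does not meet it is skipped by literal arithmetic (no `omega`); any other by the
      side tactic on the disjointness; below the last store the context's facts about `v₀.mem` apply. The read of a `ret`
      (and its canonical-address side condition) likewise: after it `w_rip : s.rip = ret`;
    * a conditional jump whose condition does not evaluate continues on BOTH arms with `hbr_<address>` — its meaning in
      arithmetic (`cond_simp` and the bridge to numbers); an arm whose condition is `False`, or contradicts the linear
      arithmetic of the context (`u_omega_lin`; off with `noprune`), is closed;
    * memory side conditions `L.Has a n`: by assumption, by a range of the context with the same base address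
      (`Layout.Has.of_add`: `L.Has (sp - 48) 56` gives every slot of the frame), by the side tactic (default `u_omega`); a store
      must miss the code span (`side_code`): the same; what is not proved is LEFT AS A GOAL, before the goals that continue;
    * `call` to a routine with a `CheckSpec` hypothesis in the context (the sanitizer's `__asan_{load,store}N_noabort`; the
      FAST PATH of the 1,093 check sites): the return address is read back from the push, the single goal `check_<addr> :
      acc s.mem a` is left (`a` the normalised address), and the walk GOES ON after the call with `w_acc_<addr> : L.Has a n`
      for the access that follows and `w_df_<addr> : s_<addr>r.flags .df = …` (a check keeps the direction flag; the other
      flags of the returned state `s_<addr>r` are unknown: `w_flags` of the steps after it is `s_<addr>r.flags.setStatus …`);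
    * `call` to a function with a contract `Calls L μ I K entry s` (UserX/Contract.lean) in the context: `Calls.use`; the goals
      `call_align`, `call_room`, `call_top`, `call_code`, `call_inv` (the callee's `AtEntry`) and `pre_<addr>` are left if the
      side tactic does not close them, and the walk STOPS after the return with `w_same`, `w_code`, `w_inv`, `w_post` (and the
      facts of the state at the callee's entry, which these are about, as `w_mem_<addr>`, `w_<reg>_<addr>`, `w_kept_<addr>`);
    * STOPS — leaving `ReachVia L μ I s P` with the frozen hypotheses — at a cut point (not at the very start), when RIP is no
      longer a literal (after `ret`; an indirect call: `u_targets` of UserX/Call.lean), outside the function (a `call` without a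
      contract), or when `I s` cannot be shown (the state is AT `__asan_report`: the path must be shown infeasible).

  Also here: `u_resolve` (the loads of a goal through the stores of `w_mem`, as the walk does it: the stack-slot facts of a
  loop invariant). Loops: UserX/Loop.lean (`u_loop`, `u_loop_back`). Call / return: UserX/Call.lean. Frames: UserX/FrameTac.lean.
  `set_option trace.u.walk true` prints the addresses walked and the side goals; `trace.u.walk.time` the milliseconds of every
  phase (also on the error stream, at once).

  Ported from the older proof layer's `v3_walk` (proofs.v3/X86V3/Walk.lean); differences: `ReachVia` instead of `Reach`; the
  state is frozen after every instruction instead of growing as a setter nest; no `fetch` argument (`HasCodeNat` carries the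
  range fact of the code); the code hypothesis is carried as `Mem.EqOn` on a span, which also serves the callees' code.
-/
import UserX.WalkLemmas
import UserX.Open
import X86.Derived.Typed.Cond
import Lean

namespace UserX.Walk
open Lean Meta Elab Tactic
open X86 X86.User

initialize registerTraceClass `u.walk
initialize registerTraceClass `u.walk.time

/-- Run `x`, tracing the milliseconds it took under the label `what` (`set_option trace.u.walk.time true`). -/
def timed {α : Type} (what : String) (x : TacticM α) : TacticM α := do
  let t0 ← IO.monoMsNow
  let r ← x
  let t1 ← IO.monoMsNow
  trace[u.walk.time] "{what}: {t1 - t0} ms"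
  -- (also at once on the error stream: a walk that does not end shows where the time goes)
  if (← getOptions).getBool `trace.u.walk.time then
    IO.eprintln s!"[u.walk.time] {what}: {t1 - t0} ms"
  return r

/-- A number in hexadecimal, for names and messages. -/
def hex (n : Nat) : String := String.ofList (Nat.toDigits 16 n)

/-! ### The components of a state and the setters of a nest -/

/-- A component of `User.State` as the walker tracks it. -/
inductive Comp where
  | reg (r : Expr)
  | rip
  | flags
  | mem
  | mxcsr
  | zmm
  deriving Inhabited

/-- The name of the component in lemma names (`rip_setReg` …). -/
def Comp.name : Comp → String
  | .reg _ => "reg"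
  | .rip => "rip"
  | .flags => "flags"
  | .mem => "mem"
  | .mxcsr => "mxcsr"
  | .zmm => "zmm"

/-- The arguments of the projection besides the state. -/
def Comp.args : Comp → Array Expr
  | .reg r => #[r]
  | _ => #[]

/-- The component of the state `s`, as a term. -/
def Comp.apply (c : Comp) (s : Expr) : Expr :=
  match c with
  | .reg r => mkApp2 (mkConst ``State.reg) s r
  | .rip => mkApp (mkConst ``State.rip) s
  | .flags => mkApp (mkConst ``State.flags) s
  | .mem => mkApp (mkConst ``State.mem) s
  | .mxcsr => mkApp (mkConst ``State.mxcsr) s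
  | .zmm => mkApp (mkConst ``State.zmm) s

/-- One layer of a setter nest: which setter, the state below, the setter's other arguments. -/
structure Setter where
  name : String
  state : Expr
  args : Array Expr

/-- The outermost setter of a state term, if it is one the walker knows. -/
def setter? (e : Expr) : Option Setter :=
  let e := e.consumeMData
  let args := e.getAppArgs
  match e.getAppFn.constName? with
  | some n =>
    if n == ``State.setReg && args.size == 3 then some ⟨"setReg", args[0]!, args.extract 1 3⟩
    else if n == ``State.setRip && args.size == 2 then some ⟨"setRip", args[0]!, args.extract 1 2⟩
    else if n == ``State.setFlags && args.size == 2 then some ⟨"setFlags", args[0]!, args.extract 1 2⟩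
    else if n == ``State.setMem && args.size == 2 then some ⟨"setMem", args[0]!, args.extract 1 2⟩
    else if n == ``State.setMxcsr && args.size == 2 then some ⟨"setMxcsr", args[0]!, args.extract 1 2⟩
    else if n == ``State.writeVecLow && args.size == 4 then some ⟨"writeVecLow", args[0]!, args.extract 1 4⟩
    else none
  | none => none

/-- The state at the bottom of a nest of setters. -/
partial def nestBottom (e : Expr) : Expr :=
  match setter? e with
  | some st => nestBottom st.state
  | none => e.consumeMData

/-- The registers a nest writes, outermost first. -/
partial def nestRegs (e : Expr) : Array Expr :=
  match setter? e with
  | some st => if st.name == "setReg" then #[st.args[0]!] ++ nestRegs st.state else nestRegs st.state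
  | none => #[]

/-- Does the nest write a vector register (a `writeVecLow` layer: the one setter of `zmm`)? -/
partial def nestWritesVec (e : Expr) : Bool :=
  match setter? e with
  | some st => st.name == "writeVecLow" || nestWritesVec st.state
  | none => false

/-- `(value, proof : c(nest) = value)`: the component `c` read through the setters of the nest, down to the component of the
state at the bottom. Proof terms only: one lemma per layer. -/
partial def proj (c : Comp) (nest : Expr) : MetaM (Expr × Expr) := do
  match setter? nest with
  | none =>
    let e := c.apply nest
    return (e, ← mkEqRefl e)
  | some st =>
    let hit : Option Name :=
      match c, st.name with
      | .rip, "setRip" => some ``State.rip_setRip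
      | .flags, "setFlags" => some ``State.flags_setFlags
      | .mem, "setMem" => some ``State.mem_setMem
      | .mxcsr, "setMxcsr" => some ``State.mxcsr_setMxcsr
      | _, _ => none
    if let some lemmaName := hit then
      return (st.args[0]!, mkAppN (mkConst lemmaName) (#[st.state] ++ st.args))
    match c, st.name with
    | .zmm, "writeVecLow" =>
      let pf := mkAppN (mkConst ``State.w_zmm_writeVecLow) (#[st.state] ++ st.args)
      let ty ← inferType pf
      return (ty.appArg!, pf)
    | .reg r', "setReg" =>
      let r := st.args[0]!
      let x := st.args[1]!
      if r == r' then
        return (x, mkAppN (mkConst ``State.reg_setReg_same) #[st.state, r, x])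
      unless r.isConst && r'.isConst do
        throwError "u_walk: a register of the state is not a constant: {r} / {r'}"
      let (v, p) ← proj c st.state
      let test ← mkEqRefl (mkConst ``Bool.false)
      let stepPf := mkAppN (mkConst ``State.reg_setReg_ne) #[st.state, r, r', x, test]
      return (v, ← mkEqTrans stepPf p)
    | _, _ =>
      -- (the walker's own lemmas for a vector-register write have a `w_`: UserX/WalkLemmas.lean)
      let pre := if st.name == "writeVecLow" then "w_" else ""
      let lemmaName := Name.str ``X86.User.State (pre ++ c.name ++ "_" ++ st.name)
      let stepPf := mkAppN (mkConst lemmaName) (#[st.state] ++ c.args ++ st.args)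
      let (v, p) ← proj c st.state
      return (v, ← mkEqTrans stepPf p)

/-- `RegsKept S base nest` from `hk : RegsKept S base bottom`: every register the nest writes is in the literal list `S`. -/
partial def keptThrough (S base hk nest : Expr) : MetaM Expr := do
  match setter? nest with
  | none => return hk
  | some st =>
    let inner ← keptThrough S base hk st.state
    let common := #[S, base, st.state, inner]
    match st.name with
    | "setReg" =>
      let test ← mkEqRefl (mkConst ``Bool.true)
      return mkAppN (mkConst ``RegsKept.setReg) (common ++ st.args ++ #[test])
    | "setRip" => return mkAppN (mkConst ``RegsKept.setRip) (common ++ st.args)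
    | "setFlags" => return mkAppN (mkConst ``RegsKept.setFlags) (common ++ st.args)
    | "setMem" => return mkAppN (mkConst ``RegsKept.setMem) (common ++ st.args)
    | "setMxcsr" => return mkAppN (mkConst ``RegsKept.setMxcsr) (common ++ st.args)
    | _ => return mkAppN (mkConst ``RegsKept.writeVecLow) (common ++ st.args)

/-! ### Literals and lists -/

/-- A closed `UInt64` term, evaluated. -/
def evalWord? (e : Expr) : MetaM (Option Nat) := do
  let e ← instantiateMVars e
  if e.hasFVar || e.hasMVar then
    return none
  try
    let w ← unsafe evalExpr UInt64 (Lean.mkConst ``UInt64) e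
    return some w.toNat
  catch _ =>
    return none

/-- The elements of a literal list `[a, b, …]`. -/
partial def listLit? (e : Expr) : Option (Array Expr) :=
  let e := e.consumeMData
  if e.isAppOfArity ``List.nil 1 then
    some #[]
  else if e.isAppOfArity ``List.cons 3 then
    match listLit? (e.getArg! 2) with
    | some rest => some (#[e.getArg! 1] ++ rest)
    | none => none
  else
    none

/-- A `Nat` numeral (`OfNat` form or raw). -/
def natOf? (e : Expr) : Option Nat :=
  let e := e.consumeMData
  match e.nat? with
  | some n => some n
  | none => e.rawNatLit?

/-- A literal list of registers from its elements. -/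
def mkRegList (rs : Array Expr) : Expr :=
  let regTy := mkConst ``X86.Reg
  rs.foldr (fun r acc => mkApp3 (mkConst ``List.cons [Level.zero]) regTy r acc) (mkApp (mkConst ``List.nil [Level.zero]) regTy)

/-- The sixteen general registers of the legacy encoding, as constants. -/
def gprs : Array Expr :=
  #[``X86.Reg.rax, ``X86.Reg.rcx, ``X86.Reg.rdx, ``X86.Reg.rbx, ``X86.Reg.rsp, ``X86.Reg.rbp, ``X86.Reg.rsi, ``X86.Reg.rdi,
    ``X86.Reg.r8, ``X86.Reg.r9, ``X86.Reg.r10, ``X86.Reg.r11, ``X86.Reg.r12, ``X86.Reg.r13, ``X86.Reg.r14,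
    ``X86.Reg.r15].map mkConst

/-- The short name of a register constant (`rax`). -/
def regName (r : Expr) : String :=
  match r.constName? with
  | some (.str _ s) => s
  | _ => "reg"

/-- Are two small terms (addresses, sizes) the same? Syntactically, or up to reducible unfolding: a numeral a person typed at
type `Word` and the one a simproc made at type `UInt64` differ in their instance arguments only. -/
def sameTerm (a b : Expr) : MetaM Bool := do
  if a == b then
    return true
  withNewMCtxDepth <| withReducible <| isDefEq a b

/-- An address `x + literal` / `x - literal` / `x`: its base and signed offset. -/
def splitAddr (e : Expr) : MetaM (Expr × Int) := do
  let e := e.consumeMData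
  if e.isAppOfArity ``HAdd.hAdd 6 then
    if let some (n, _) ← getOfNatValue? e.appArg! ``UInt64 then
      return (e.appFn!.appArg!, Int.ofNat n)
  if e.isAppOfArity ``HSub.hSub 6 then
    if let some (n, _) ← getOfNatValue? e.appArg! ``UInt64 then
      return (e.appFn!.appArg!, - Int.ofNat n)
  return (e, 0)

/-! ### What the context says about the current state -/

/-- The walker's reading of the context, for the state variable `v`. `proof` terms are hypotheses (free variables). -/
structure WS where
  v : Expr
  rip? : Option (Expr × Expr) := none
  /-- register, proof of `v.reg r = value`, value -/
  regs : Array (Expr × Expr × Expr) := #[]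
  /-- proof of `RegsKept S base v`, `S`, `base` -/
  kept? : Option (Expr × Expr × Expr) := none
  mem? : Option (Expr × Expr) := none
  flags? : Option (Expr × Expr) := none
  mxcsr? : Option (Expr × Expr) := none
  zmm? : Option (Expr × Expr) := none
  /-- every `Mem.EqOn lo hi _ v.mem` of the context: proof and statement -/
  eqs : Array (Expr × Expr) := #[]
  /-- the hypotheses about `v` that the walker made itself (names `w_…`): superseded by the next freeze -/
  own : Array FVarId := #[]

/-- The fact about register `r`, if any. -/
def WS.reg? (ws : WS) (r : Expr) : Option (Expr × Expr) :=
  match ws.regs.find? (fun t => t.1 == r) with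
  | some (_, p, x) => some (p, x)
  | none => none

/-- Read the context of the current goal for facts about the state variable `v`. -/
def scanState (v : Expr) : MetaM WS := do
  let mut ws : WS := { v := v }
  for d in ← getLCtx do
    if d.isImplementationDetail then continue
    let ty0 := (← instantiateMVars d.type).cleanupAnnotations
    -- (an abbreviation of a span fact — `Vorbis.CodeOK u₀ v.mem` for `Mem.EqOn lo hi u₀.mem v.mem` — is unfolded)
    let ty ← match ty0.getAppFn.constName? with
      | some c =>
        if (← isReducible c) && !ty0.isAppOf ``Eq && !ty0.isAppOf ``RegsKept && !ty0.isAppOf ``Mem.EqOn then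
          pure (← whnfR ty0).cleanupAnnotations
        else
          pure ty0
      | none => pure ty0
    let isOwn := d.userName.toString.startsWith "w_" && !d.userName.hasMacroScopes
    let mut about := false
    if ty.isAppOfArity ``Eq 3 then
      let lhs := (ty.getArg! 1).consumeMData
      let rhs := ty.getArg! 2
      if lhs.isAppOfArity ``State.rip 1 && lhs.appArg! == v then
        ws := { ws with rip? := some (d.toExpr, rhs) }
        about := true
      else if lhs.isAppOfArity ``State.reg 2 && lhs.getArg! 0 == v then
        let r := lhs.getArg! 1
        ws := { ws with regs := (ws.regs.filter fun t => t.1 != r).push (r, d.toExpr, rhs) }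
        about := true
      else if lhs.isAppOfArity ``State.mem 1 && lhs.appArg! == v then
        ws := { ws with mem? := some (d.toExpr, rhs) }
        about := true
      else if lhs.isAppOfArity ``State.flags 1 && lhs.appArg! == v then
        ws := { ws with flags? := some (d.toExpr, rhs) }
        about := true
      else if lhs.isAppOfArity ``State.mxcsr 1 && lhs.appArg! == v then
        ws := { ws with mxcsr? := some (d.toExpr, rhs) }
        about := true
      else if lhs.isAppOfArity ``State.zmm 1 && lhs.appArg! == v then
        ws := { ws with zmm? := some (d.toExpr, rhs) }
        about := true
    else if ty.isAppOfArity ``RegsKept 3 && ty.getArg! 2 == v then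
      ws := { ws with kept? := some (d.toExpr, ty.getArg! 0, ty.getArg! 1) }
      about := true
    else if ty.isAppOfArity ``Mem.EqOn 4 then
      let m := (ty.getArg! 3).consumeMData
      if m.isAppOfArity ``State.mem 1 && m.appArg! == v then
        ws := { ws with eqs := ws.eqs.push (d.toExpr, ty) }
        about := true
    if about && isOwn then
      ws := { ws with own := ws.own.push d.fvarId }
  return ws

/-- Is `lhs` one of the shapes whose equations are rewrite rules of a step: `x.reg r`, `x.rip`, `x.mem.readLE a k`,
`UInt64.ofNat (x.mem.readLE a k)` with `x` a variable? -/
def isViewFactLhs (lhs : Expr) : Bool :=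
  let lhs := lhs.consumeMData
  let isVar (e : Expr) := e.consumeMData.isFVar
  let isMemOfVar (e : Expr) := e.isAppOfArity ``State.mem 1 && isVar (e.getArg! 0)
  let isReadLE (e : Expr) := e.isAppOfArity ``Mem.readLE 3 && isMemOfVar (e.getArg! 0).consumeMData
  (lhs.isAppOfArity ``State.reg 2 && isVar (lhs.getArg! 0)) ||
  (lhs.isAppOfArity ``State.rip 1 && isVar (lhs.getArg! 0)) ||
  isReadLE lhs ||
  (lhs.isAppOfArity ``UInt64.ofNat 1 && isReadLE (lhs.getArg! 0).consumeMData)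

/-- The rewrite rules of a step, as terms: the view facts of the context, and for every `h : RegsKept S a b` (`S` a literal list,
`b` a variable) the facts `b.reg r = a.reg r` for the general registers outside `S`. -/
def stepFacts : MetaM (Array Expr) := do
  let mut out : Array Expr := #[]
  for d in ← getLCtx do
    if d.isImplementationDetail then continue
    let ty := (← instantiateMVars d.type).cleanupAnnotations
    if ty.isAppOfArity ``Eq 3 && isViewFactLhs (ty.getArg! 1) then
      out := out.push d.toExpr
    else if ty.isAppOfArity ``RegsKept 3 && (ty.getArg! 2).consumeMData.isFVar then
      let some S := listLit? (ty.getArg! 0) | continue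
      let test ← mkEqRefl (mkConst ``Bool.false)
      for r in gprs do
        unless S.contains r do
          out := out.push (mkAppN (mkConst ``RegsKept.get) #[ty.getArg! 0, ty.getArg! 1, ty.getArg! 2, d.toExpr, r, test])
  return out

/-! ### Small rewriting steps -/

/-- `e` with every subterm SYNTACTICALLY equal to `p` replaced by the bound variable 0 (loose: instantiate it or wrap a binder
round it). Never `kabstract`: its candidates are compared up to definitional equality, and comparing two nests of setters
that way makes the unifier evaluate symbolic flags (PROOF-NOTES §13). -/
def abstractSyn (e p : Expr) : Expr :=
  -- through a fresh free variable: `Expr.replace` and `Expr.abstract` both cache shared subterms (the values of a long walk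
  -- are DAGs; a plain recursion would visit them as trees)
  let x := mkFVar ⟨`_u_walk_abstract⟩
  let e' := e.replace fun t => if t == p then some x else none
  e'.abstract #[x]

/-- Rewrite every instance of `lhs` in the target by `rhs` (`pf : lhs = rhs`); the goal is returned unchanged if there is none. -/
def rewriteTarget (g : MVarId) (lhs rhs pf : Expr) : MetaM MVarId := g.withContext do
  let t ← instantiateMVars (← g.getType)
  let abs := abstractSyn t lhs
  unless abs.hasLooseBVars do
    return g
  let motive := mkLambda `x .default (← inferType lhs) abs
  let eqPf ← mkCongrArg motive pf
  g.replaceTargetEq (abs.instantiate1 rhs) eqPf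

/-- The same in a hypothesis. Returns the new goal and the hypothesis (which keeps its name). -/
def rewriteHyp (g : MVarId) (h : FVarId) (lhs rhs pf : Expr) : MetaM (MVarId × FVarId) := g.withContext do
  let t ← instantiateMVars (← h.getType)
  let abs := abstractSyn t lhs
  unless abs.hasLooseBVars do
    return (g, h)
  let motive := mkLambda `x .default (← inferType lhs) abs
  let eqPf ← mkCongrArg motive pf
  let r ← g.replaceLocalDecl h (abs.instantiate1 rhs) eqPf
  return (r.mvarId, r.fvarId)

/-- Run a tactic on one goal; the goals it leaves. `none` if it fails (the state is restored). -/
def runOn (g : MVarId) (tac : Syntax) : TacticM (Option (List MVarId)) := do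
  let s ← saveState
  try
    setGoals [g]
    evalTactic tac
    let gs ← getUnsolvedGoals
    return some gs
  catch _ =>
    s.restore
    return none

/-- Try to close a goal with a tactic; `true` if closed (otherwise the state is restored). -/
def closes (g : MVarId) (tac : Syntax) : TacticM Bool := do
  let s ← saveState
  match ← runOn g tac with
  | some [] => return true
  | _ =>
    s.restore
    return false

/-! ### The configuration of one walk -/

/-- What `u_walk` was called with. -/
structure Cfg where
  /-- the proof of `HasCodeNat L c base N len` -/
  code : Expr
  /-- the state `c` whose memory holds the code -/
  codeState : Expr
  layout : Expr
  codeName : Name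
  base : Nat
  len : Nat
  /-- the code span `[lo, hi)` and the proofs that it contains the function -/
  lo : Nat
  hi : Nat
  hlo : Expr
  hhi : Expr
  extra : Array (TSyntax `Lean.Parser.Tactic.simpLemma)
  cuts : List Nat
  /-- the tactic for side conditions the structural rules do not close -/
  sideTac : Syntax
  /-- prune infeasible arms with `u_omega_lin` -/
  prune : Bool
  /-- the walk tracks the vector registers: the context had a fact `v.zmm = …` when the walk STARTED (the request of the file
  header). Decided once per `u_walk`, not per step: a check call states a fact about `zmm` too, and that is not a request -/
  trackZmm : Bool := false
  /-- simp contexts: the meaning of conditions; the clean-up of values -/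
  condCtx : Simp.Context
  condProcs : Simp.SimprocsArray
  valCtx : Simp.Context
  valProcs : Simp.SimprocsArray

/-- `Mem.EqOn lo hi c.mem v.mem` for the span of the walk, from the context (or `refl` when `v` is `c`). -/
def findCodeEq (cfg : Cfg) (ws : WS) : MetaM (Option Expr) := do
  let cmem := mkApp (mkConst ``State.mem) cfg.codeState
  for (pf, ty) in ws.eqs do
    let lo ← whnfD (ty.getArg! 0)
    let hi ← whnfD (ty.getArg! 1)
    if lo.rawNatLit? == some cfg.lo && hi.rawNatLit? == some cfg.hi && (ty.getArg! 2).consumeMData == cmem then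
      return some pf
    if let (some l, some h) := (natOf? (ty.getArg! 0), natOf? (ty.getArg! 1)) then
      if l == cfg.lo && h == cfg.hi && (ty.getArg! 2).consumeMData == cmem then
        return some pf
  if ws.v == cfg.codeState then
    return some (mkApp3 (mkConst ``Mem.EqOn.refl) (mkNatLit cfg.lo) (mkNatLit cfg.hi) cmem)
  return none

/-! ### Side conditions -/

/-- A hypothesis `L.Has b n` of the context whose range contains `[a, a + k)` and has the same base address: the proof of
`L.Has a k` by `Layout.Has.of_add`. -/
def hasFromContext (g : MVarId) (L a k : Expr) : TacticM (Option Expr) := g.withContext do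
  let some kN := natOf? k | return none
  let (baseA, offA) ← splitAddr a
  for d in ← getLCtx do
    if d.isImplementationDetail then continue
    let ty := (← instantiateMVars d.type).cleanupAnnotations
    unless ty.isAppOfArity ``Layout.Has 3 do continue
    unless ty.getArg! 0 == L do continue
    let b := ty.getArg! 1
    let n := ty.getArg! 2
    if (← sameTerm b a) && (← sameTerm n k) then
      return some d.toExpr
    let some nN := natOf? n | continue
    let (baseB, offB) ← splitAddr b
    unless ← sameTerm baseA baseB do continue
    let diff := offA - offB
    if diff < 0 || diff.toNat + kN > nN then continue
    -- `b + d = a` by the address normal form; the two closed facts by evaluation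
    let dE := toExpr (UInt64.ofNat diff.toNat)
    let eqTy ← mkEq (← mkAppM ``HAdd.hAdd #[b, dE]) a
    let eqG ← mkFreshExprSyntheticOpaqueMVar eqTy
    let ok ← closes eqG.mvarId! (← `(tactic| first
      | (with_reducible rfl)
      | (simp only [Word.addrNorm, Word.addrNormSub, UInt64.add_zero])))
    unless ok do continue
    let bound ← mkAppM ``LE.le #[← mkAppM ``HAdd.hAdd #[← mkAppM ``UInt64.toNat #[dE], k], n]
    let boundPf ← mkDecideProof bound
    return some (← mkAppM ``Layout.Has.of_add #[d.toExpr, dE, k, eqG, boundPf])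
  return none

/-- Try to close a side goal: by the structural rules, then by the side tactic. Returns the goal if it stays open. -/
def dischargeSide (cfg : Cfg) (g : MVarId) : TacticM (Option MVarId) := g.withContext do
  if ← g.isAssigned then
    return none
  let ty := (← instantiateMVars (← g.getType)).cleanupAnnotations
  if ty.isAppOfArity ``Layout.Has 3 then
    if let some pf ← hasFromContext g (ty.getArg! 0) (ty.getArg! 1) (ty.getArg! 2) then
      g.assign pf
      return none
  let closedGoal := !(ty.hasFVar || ty.hasMVar)
  if closedGoal then
    if ← closes g (← `(tactic| decide)) then
      return none
  if ← closes g (← `(tactic| first | (with_reducible assumption) | (with_reducible rfl))) then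
    return none
  -- the image's code at a callee's entry, for a convention whose code is `Code.ofMem` (UserX/Contract.lean): the span fact
  if ty.isAppOfArity ``Code.In 2 then
    if ← closes g (← `(tactic| exact X86.User.Code.ofMem_in_of_eqOn (by decide) (by assumption))) then
      return none
  if ← timed "side tactic" (closes g cfg.sideTac) then
    return none
  return some g

/-! ### Loads through the stores of the walk -/

/-- A proof of `L.Has a k` among the hypotheses of the context or the given extra facts (syntactic match). -/
def findHas (L a k : Expr) (extraHas : Array (Expr × Expr)) : MetaM (Option Expr) := do
  for d in ← getLCtx do
    if d.isImplementationDetail then continue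
    let ty := (← instantiateMVars d.type).cleanupAnnotations
    if ty.isAppOfArity ``Layout.Has 3 && ty.getArg! 0 == L then
      if (← sameTerm (ty.getArg! 1) a) && (← sameTerm (ty.getArg! 2) k) then
        return some d.toExpr
  for (ty, pf) in extraHas do
    if ty.isAppOfArity ``Layout.Has 3 && ty.getArg! 0 == L then
      if (← sameTerm (ty.getArg! 1) a) && (← sameTerm (ty.getArg! 2) k) then
        return some pf
  return none

/-- `(value, proof : M.readLE a k = value)`: the load read through the `writeLE` layers of the memory term `M`. A layer with the
same address and size gives the value stored; a layer with the same base address that does not meet the load is skipped by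
literal arithmetic; any other by the side tactic on the disjointness; if that fails the read stays at that layer. -/
partial def peelRead (cfg : Cfg) (g : MVarId) (M a k : Expr) (extraHas : Array (Expr × Expr)) : TacticM (Expr × Expr) :=
  g.withContext do
  let M' := M.consumeMData
  let stay : TacticM (Expr × Expr) := do
    let e := mkApp3 (mkConst ``Mem.readLE) M a k
    -- a fact of the context about exactly this read
    for d in ← getLCtx do
      if d.isImplementationDetail then continue
      let ty := (← instantiateMVars d.type).cleanupAnnotations
      if ty.isAppOfArity ``Eq 3 then
        let lhs := (ty.getArg! 1).consumeMData
        if lhs.isAppOfArity ``Mem.readLE 3 && lhs.getArg! 0 == M then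
          if (← sameTerm (lhs.getArg! 1) a) && (← sameTerm (lhs.getArg! 2) k) then
            return (ty.getArg! 2, ← mkEqTrans (← mkEqRefl e) d.toExpr)
    return (e, ← mkEqRefl e)
  unless M'.isAppOfArity ``Mem.writeLE 4 do
    return ← stay
  let M1 := M'.getArg! 0
  let b := M'.getArg! 1
  let n := M'.getArg! 2
  let x := M'.getArg! 3
  if (← sameTerm b a) && (← sameTerm n k) then
    let bound ← mkDecideProof (← mkAppM ``LE.le #[k, mkNatLit 16])
    let pf := mkAppN (mkConst ``Mem.readLE_writeLE_same') #[M1, a, k, x, bound]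
    let val ← mkAppM ``HMod.hMod #[x, ← mkAppM ``HPow.hPow #[mkNatLit 256, k]]
    return (val, pf)
  let L := cfg.layout
  -- the two range facts: a hypothesis, a fact of this step, or a sub-range of a hypothesis with the same base address
  let rangeFact (x sz : Expr) : TacticM (Option Expr) := do
    match ← findHas L x sz extraHas with
    | some h => return some h
    | none => hasFromContext g L x sz
  let some ha ← rangeFact a k | return ← stay
  let some hb ← rangeFact b n | return ← stay
  let some kN := natOf? k | return ← stay
  let some nN := natOf? n | return ← stay
  let (baseA, offA) ← splitAddr a
  let (baseB, offB) ← splitAddr b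
  let mut stepPf? : Option Expr := none
  if ← sameTerm baseA baseB then
    -- the load lies below the store: `a + d = b`, `k ≤ d`; or above: `b + d = a`, `n ≤ d`
    let below := offA + kN ≤ offB
    let above := offB + nN ≤ offA
    if below || above then
      let diff : Nat := if below then (offB - offA).toNat else (offA - offB).toNat
      let dE := toExpr (UInt64.ofNat diff)
      let eqTy ← if below then mkEq (← mkAppM ``HAdd.hAdd #[a, dE]) b else mkEq (← mkAppM ``HAdd.hAdd #[b, dE]) a
      let eqG ← mkFreshExprSyntheticOpaqueMVar eqTy
      let ok ← closes eqG.mvarId! (← `(tactic| first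
        | (with_reducible rfl)
        | (simp only [Word.addrNorm, Word.addrNormSub, UInt64.add_zero])))
      if ok then
        let dNat ← mkAppM ``UInt64.toNat #[dE]
        let pos ← mkDecideProof (← mkAppM ``LT.lt #[mkNatLit 0, if below then k else n])
        let le ← mkDecideProof (← mkAppM ``LE.le #[if below then k else n, dNat])
        let lt ← mkDecideProof (← mkAppM ``LT.lt #[dNat, ← mkAppM ``HPow.hPow #[mkNatLit 2, mkNatLit 62]])
        let lemmaName := if below then ``Mem.readLE_writeLE_below else ``Mem.readLE_writeLE_above
        stepPf? := some (← mkAppOptM lemmaName #[L, M1, a, b, n, k, x, hb, ha, pos, dE, eqG, le, lt])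
  if stepPf?.isNone then
    -- the general form: the disjointness by the side tactic, with the two range facts at hand
    let aN ← mkAppM ``UInt64.toNat #[a]
    let bN ← mkAppM ``UInt64.toNat #[b]
    let disj := mkOr (← mkAppM ``LE.le #[← mkAppM ``HAdd.hAdd #[aN, k], bN])
      (← mkAppM ``LE.le #[← mkAppM ``HAdd.hAdd #[bN, n], aN])
    let goalTy ← mkArrow (← inferType ha) (← mkArrow (← inferType hb) disj)
    let dG ← mkFreshExprSyntheticOpaqueMVar goalTy
    let ok ← closes dG.mvarId! (← `(tactic| (intro _ _; $(⟨cfg.sideTac⟩):tactic)))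
    if ok then
      let hd := mkApp2 dG ha hb
      stepPf? := some (← mkAppOptM ``Mem.readLE_writeLE_disj #[L, M1, a, b, n, k, x, hb, ha, hd])
  match stepPf? with
  | none => stay
  | some stepPf =>
    let (val, pf) ← peelRead cfg g M1 a k extraHas
    return (val, ← mkEqTrans stepPf pf)

/-- Clean up a value with the walk's small simp set (`x.toNat % 256 ^ 8`, `Word.ofBV (x.toBV 64)`, addresses …). -/
def cleanValue (cfg : Cfg) (e : Expr) : MetaM (Expr × Option Expr) := do
  let (r, _) ← simp e cfg.valCtx cfg.valProcs
  return (r.expr, r.proof?)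

/-- `(value, proof : v.mem.readLE a k = value)` for the current state `v`. -/
def resolveRead (cfg : Cfg) (g : MVarId) (ws : WS) (a k : Expr) (extraHas : Array (Expr × Expr)) :
    TacticM (Expr × Expr) := g.withContext do
  let vmem := mkApp (mkConst ``State.mem) ws.v
  let e := mkApp3 (mkConst ``Mem.readLE) vmem a k
  match ws.mem? with
  | none => return (e, ← mkEqRefl e)
  | some (hmem, M) =>
    let motive := mkLambda `m .default (mkConst ``Mem) (mkApp3 (mkConst ``Mem.readLE) (mkBVar 0) a k)
    let first ← mkCongrArg motive hmem
    let (val, pf) ← peelRead cfg g M a k extraHas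
    return (val, ← mkEqTrans first pf)

/-- All distinct subterms `v.mem.readLE a k` of `e`. -/
def readsOf (v : Expr) (e : Expr) : Array Expr :=
  let vmem := mkApp (mkConst ``State.mem) v
  Id.run do
    let mut out : Array Expr := #[]
    let mut stack : Array Expr := #[e]
    let mut seen : Std.HashSet Expr := {}
    while !stack.isEmpty do
      let x := stack.back!
      stack := stack.pop
      if seen.contains x then continue
      seen := seen.insert x
      if x.isAppOfArity ``Mem.readLE 3 && (x.getArg! 0).consumeMData == vmem && !x.hasLooseBVars then
        unless out.contains x do
          out := out.push x
      match x with
      | .app f a =>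
        stack := stack.push f
        stack := stack.push a
      | .lam _ t b _ | .forallE _ t b _ =>
        stack := stack.push t
        stack := stack.push b
      | .letE _ t val b _ =>
        stack := stack.push t
        stack := stack.push val
        stack := stack.push b
      | .mdata _ b | .proj _ _ b => stack := stack.push b
      | _ => pure ()
    return out

/-- All distinct subterms `UInt64.ofNat (m.readLE a k)` of `e`. -/
def wordLoadsOf (e : Expr) : Array Expr :=
  Id.run do
    let mut out : Array Expr := #[]
    let mut stack : Array Expr := #[e]
    let mut seen : Std.HashSet Expr := {}
    while !stack.isEmpty do
      let x := stack.back!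
      stack := stack.pop
      if seen.contains x then continue
      seen := seen.insert x
      if x.isAppOfArity ``UInt64.ofNat 1 && x.appArg!.consumeMData.isAppOfArity ``Mem.readLE 3 && !x.hasLooseBVars then
        unless out.contains x do
          out := out.push x
      match x with
      | .app f a =>
        stack := stack.push f
        stack := stack.push a
      | .lam _ t b _ | .forallE _ t b _ =>
        stack := stack.push t
        stack := stack.push b
      | .letE _ t val b _ =>
        stack := stack.push t
        stack := stack.push val
        stack := stack.push b
      | .mdata _ b | .proj _ _ b => stack := stack.push b
      | _ => pure ()
    return out

/-- In the target of `g`: the flags, MXCSR, the vector registers and the registers of the current state `v` by what the context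
says of them, and its loads by what the memory of the walk gives. -/
def resolveTarget (cfg : Cfg) (g : MVarId) (ws : WS) (extraHas : Array (Expr × Expr)) : TacticM MVarId := do
  let mut g := g
  -- whole components
  for (c, fact?) in [(Comp.flags, ws.flags?), (Comp.mxcsr, ws.mxcsr?), (Comp.zmm, ws.zmm?)] do
    if let some (pf, val) := fact? then
      g ← rewriteTarget g (c.apply ws.v) val pf
  for (r, pf, val) in ws.regs do
    g ← rewriteTarget g (Comp.apply (.reg r) ws.v) val pf
  -- loads
  let t ← instantiateMVars (← g.getType)
  for rd in readsOf ws.v t do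
    let a := rd.getArg! 1
    let k := rd.getArg! 2
    let (val, pf) ← resolveRead cfg g ws a k extraHas
    if val == rd then continue
    g ← rewriteTarget g rd val pf
  -- facts of the context about a loaded WORD: `UInt64.ofNat (m.readLE a k) = x` (a return address, a pointer field)
  let mut wordFacts : Array (Expr × Expr × Expr) := #[]
  for d in ← g.withContext getLCtx do
    if d.isImplementationDetail then continue
    let ty := (← instantiateMVars d.type).cleanupAnnotations
    unless ty.isAppOfArity ``Eq 3 do continue
    let lhs := (ty.getArg! 1).consumeMData
    if lhs.isAppOfArity ``UInt64.ofNat 1 && (lhs.appArg!.consumeMData).isAppOfArity ``Mem.readLE 3 then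
      wordFacts := wordFacts.push (lhs, ty.getArg! 2, d.toExpr)
  unless wordFacts.isEmpty do
    let t ← instantiateMVars (← g.getType)
    let loads := wordLoadsOf t
    for ld in loads do
      let rd := ld.appArg!.consumeMData
      for (lhs, rhs, pf) in wordFacts do
        let rdF := lhs.appArg!.consumeMData
        if rdF.getArg! 0 == rd.getArg! 0 then
          if (← sameTerm (rdF.getArg! 1) (rd.getArg! 1)) && (← sameTerm (rdF.getArg! 2) (rd.getArg! 2)) then
            g ← rewriteTarget g ld rhs pf
            break
  return g

/-! ### Freezing the state an instruction leaves -/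

/-- **Hypotheses as `have`s**: the goal becomes `(fun h₁ … hₙ => ?new) v₁ … vₙ` — a β-redex that STAYS one. (`MVarId.assert`
makes `?m v₁ … vₙ` with `?m := fun h₁ … hₙ => …`, which `instantiateMVars` β-reduces: every use of a hypothesis is then replaced
by its proof, and a walk's chain of hypotheses about states that are nests over states grows exponentially as a term.) -/
def bindHyps (g : MVarId) (hyps : Array Hypothesis) : MetaM (Array FVarId × MVarId) := g.withContext do
  let target ← g.getType
  let tag ← g.getTag
  let rec go (i : Nat) (xs : Array Expr) : MetaM (Array FVarId × MVarId × Expr) := do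
    if h : i < hyps.size then
      withLocalDeclD hyps[i].userName hyps[i].type fun x => go (i + 1) (xs.push x)
    else
      let newG ← mkFreshExprSyntheticOpaqueMVar target tag
      let lam ← mkLambdaFVars xs newG
      return (xs.map (·.fvarId!), newG.mvarId!, lam)
  let (fvs, newG, lam) ← go 0 #[]
  g.assign (mkAppN lam (hyps.map (·.value)))
  return (fvs, newG)

/-- Replace the state `nest` of the goal `ReachVia L μ I nest P` by a fresh variable `s` with `w_def : s = nest` (as a β-redex
that stays one: see `bindHyps`). -/
def generalizeState (g : MVarId) (nest : Expr) (name : Name) : MetaM (FVarId × FVarId × MVarId) := g.withContext do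
  let t := (← instantiateMVars (← g.getType)).cleanupAnnotations
  let args := t.getAppArgs
  let stateTy := mkConst ``X86.User.State
  let tag ← g.getTag
  withLocalDeclD name stateTy fun s => do
    withLocalDeclD `w_def (← mkEq s nest) fun h => do
      let body := mkAppN t.getAppFn (args.set! 3 s)
      let newG ← mkFreshExprSyntheticOpaqueMVar body tag
      let lam ← mkLambdaFVars #[s, h] newG
      g.assign (mkApp2 lam nest (← mkEqRefl nest))
      return (s.fvarId!, h.fvarId!, newG.mvarId!)

/-- Is `nm` a name the walker made: the prefix and an address in hexadecimal (with the `r` of a returned state, the `b` of a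
second value of one instruction)? -/
def isWalkerName (nm pre : String) : Bool :=
  nm.startsWith pre &&
    (nm.toList.drop pre.length).all fun c => c.isDigit || ('a' ≤ c && c ≤ 'f') || c == 'r'

/-- The result of a freeze: the goal about the new variable, and the side goals it made (a store must miss the code span). -/
structure Frozen where
  goal : MVarId
  sides : List MVarId

/-- The memory `m` (a nest of `writeLE` over `v.mem`) agrees with the code state's memory on the span: from `weq` for `v.mem`,
one disjointness side goal per store. -/
partial def carryEq (cfg : Cfg) (g : MVarId) (weq : Expr) (vmem m : Expr) (extraHas : Array (Expr × Expr)) :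
    TacticM (Option (Expr × List MVarId)) := g.withContext do
  let m' := m.consumeMData
  if m' == vmem then
    return some (weq, [])
  unless m'.isAppOfArity ``Mem.writeLE 4 do
    return none
  let some (inner, sides) ← carryEq cfg g weq vmem (m'.getArg! 0) extraHas | return none
  let a := m'.getArg! 1
  let k := m'.getArg! 2
  let x := m'.getArg! 3
  let L := cfg.layout
  let mut sides := sides
  let ha ← match ← findHas L a k extraHas with
    | some h => pure h
    | none =>
      let hG ← mkFreshExprSyntheticOpaqueMVar (mkApp3 (mkConst ``Layout.Has) L a k) `side_has
      sides := sides ++ [hG.mvarId!]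
      pure hG
  let aN ← mkAppM ``UInt64.toNat #[a]
  let missTy := mkOr (← mkAppM ``LE.le #[← mkAppM ``HAdd.hAdd #[aN, k], mkNatLit cfg.lo])
    (← mkAppM ``LE.le #[mkNatLit cfg.hi, aN])
  let missG ← mkFreshExprSyntheticOpaqueMVar missTy `side_code
  sides := sides ++ [missG.mvarId!]
  let pf ← mkAppOptM ``Mem.EqOn.step_writeLE_has #[L, mkNatLit cfg.lo, mkNatLit cfg.hi, none, none, a, k, x, inner, ha, missG]
  return some (pf, sides)

/-- `(f.setStatus a).setStatus b` is `f.setStatus b` when `b` defines all six status flags (`Flags.setStatus_of_writesAll`; the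
side condition by the `…_writesAll` lemmas of X86/Derived/Typed/AluFlags.lean). Returns the value and the proof extended. -/
partial def collapseFlags (g : MVarId) (val pf : Expr) : TacticM (Expr × Expr) := g.withContext do
  let top := val.consumeMData
  unless top.isAppOfArity ``Flags.setStatus 2 do
    return (val, pf)
  let below := (top.getArg! 0).consumeMData
  unless below.isAppOfArity ``Flags.setStatus 2 do
    return (val, pf)
  let b := top.getArg! 1
  -- the producer, read off the term (never by unification: comparing two flag records unfolds the ALU)
  let b' := b.consumeMData
  let (record, fill?) :=
    if b'.isAppOfArity ``StatusFlags.fill 2 then ((b'.getArg! 0).consumeMData, some (b'.getArg! 1)) else (b', none)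
  let producer := if record.isAppOfArity ``Alu.Out.flags 2 then (record.getArg! 1).consumeMData
    else if record.isAppOfArity ``Alu.MulOut.flags 2 then (record.getArg! 1).consumeMData
    else record
  let pargs := producer.getAppArgs
  let side? : Option Expr ← do
    match producer.getAppFn.constName?, fill? with
    | some ``Alu.sub, none => pure (some (mkAppN (mkConst ``Alu.sub_writesAll) pargs))
    | some ``Alu.add, none => pure (some (mkAppN (mkConst ``Alu.add_writesAll) pargs))
    | some ``Alu.adc, none => pure (some (mkAppN (mkConst ``Alu.adc_writesAll) pargs))
    | some ``Alu.sbb, none => pure (some (mkAppN (mkConst ``Alu.sbb_writesAll) pargs))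
    | some ``Alu.neg, none => pure (some (mkAppN (mkConst ``Alu.neg_writesAll) pargs))
    | some ``Alu.logic, some v => pure (some (mkAppN (mkConst ``Alu.logic_fill_writesAll) (pargs.push v)))
    | some ``Alu.mul, some v => pure (some (mkAppN (mkConst ``Alu.mul_fill_writesAll) (pargs.push v)))
    | some ``Alu.shift, some v =>
      -- a shift by a literal count that is not zero after masking
      if pargs.size == 5 then
        let cnt := pargs[3]!
        if cnt.hasFVar || cnt.hasMVar then
          pure none
        else
          let ne ← mkAppM ``Ne #[← mkAppM ``Alu.shiftCount #[pargs[0]!, cnt], mkNatLit 0]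
          let h ← mkDecideProof ne
          pure (some (mkAppN (mkConst ``Alu.shift_fill_writesAll) (pargs.push v |>.push h)))
      else
        pure none
    | some n, none =>
      -- a producer of another layer (the SSE compares: `Sem.comisStatus r`), by the name of its lemma `<producer>_writesAll`
      let lemmaName := Name.str n.getPrefix (n.getString! ++ "_writesAll")
      if (← getEnv).contains lemmaName then
        pure (some (mkAppN (mkConst lemmaName) pargs))
      else
        pure none
    | _, _ => pure none
  let some sideG := side? | return (val, pf)
  let f := below.getArg! 0
  let a := below.getArg! 1
  let step := mkAppN (mkConst ``Flags.setStatus_of_writesAll) #[f, a, b, sideG]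
  let newVal := mkApp2 (mkConst ``Flags.setStatus) f b
  collapseFlags g newVal (← mkEqTrans pf step)

/-- **Freeze**: the goal `ReachVia L μ I nest P`, `nest` a nest of setters over the variable `ws.v`, becomes
`ReachVia L μ I s P` for a fresh variable `s` described by hypotheses `w_…`; the walker's hypotheses about `ws.v` are cleared.
`extraHas`: range facts of this step's accesses (statement, proof). -/
def freeze (cfg : Cfg) (g : MVarId) (ws : WS) (extraHas : Array (Expr × Expr)) (addr : Nat) : TacticM Frozen := do
  let g ← resolveTarget cfg g ws extraHas
  g.withContext do
  let t := (← instantiateMVars (← g.getType)).cleanupAnnotations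
  let nest := t.getArg! 3
  let v := ws.v
  unless nestBottom nest == v do
    throwError "u_walk: the state after the step is not a nest of setters over the current state:{indentExpr nest}"
  let stateTy := mkConst ``X86.User.State
  -- the components of the nest, in terms of the facts about `v`
  let compFact (c : Comp) (old? : Option (Expr × Expr)) : MetaM (Expr × Expr) := do
    let (val, pf) ← proj c nest
    match old? with
    | some (h, x) =>
      -- the component of `v` — the whole value, or inside it (`v.zmm.set …`) — by what the context says of it
      let abs := abstractSyn val (c.apply v)
      if abs.hasLooseBVars then
        let motive := mkLambda `x .default (← inferType (c.apply v)) abs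
        return (abs.instantiate1 x, ← mkEqTrans pf (← mkCongrArg motive h))
      else
        return (val, pf)
    | none => return (val, pf)
  -- registers: the set of those written since the base, and the value of each
  let written := nestRegs nest
  let (hk0, S0, base) ← match ws.kept? with
    | some (h, S, b) => pure (h, S, b)
    | none => pure (mkApp2 (mkConst ``RegsKept.refl) (mkRegList #[]) v, mkRegList #[], v)
  let some S0list := listLit? S0 | throwError "u_walk: the register list of the frame is not a literal:{indentExpr S0}"
  let mut Slist := S0list
  let mut hk := hk0
  for r in written.reverse do
    unless Slist.contains r do
      hk := mkAppN (mkConst ``RegsKept.cons) #[mkRegList Slist, base, v, hk, r]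
      Slist := #[r] ++ Slist
  let S := mkRegList Slist
  let hkNest ← keptThrough S base hk nest
  -- the memory, before the facts about `v.mem` are used: what the code span and the new `w_mem` are computed from
  let vmem := Comp.mem.apply v
  let (memRaw, memPf) ← proj .mem nest
  let weq? ← findCodeEq cfg ws
  let mut sides : List MVarId := []
  let mut eqNest? : Option Expr := none
  if let some weq := weq? then
    match ← carryEq cfg g weq vmem memRaw extraHas with
    | some (pf, ss) =>
      eqNest? := some pf
      sides := ss
    | none => logWarning m!"u_walk: at {hex addr}H the memory is not a nest of stores; the code hypothesis is not carried"
  -- the new variable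
  let (sId, defId, g) ← generalizeState g nest (Name.mkSimple s!"s_{hex addr}")
  g.withContext do
  let s := mkFVar sId
  let hdef := mkFVar defId
  let viaDef (c : Comp) (pf : Expr) : MetaM Expr := do
    let motive := mkLambda `s .default stateTy (c.apply (mkBVar 0))
    mkEqTrans (← mkCongrArg motive hdef) pf
  let mut hyps : Array Hypothesis := #[]
  -- rip
  let (ripVal, ripPf) ← compFact .rip ws.rip?
  hyps := hyps.push { userName := `w_rip, type := ← mkEq (Comp.rip.apply s) ripVal, value := ← viaDef .rip ripPf }
  -- registers
  for r in Slist do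
    let c := Comp.reg r
    let (val, pf) ← proj c nest
    let (val, pf) ←
      if val == c.apply v then
        match ws.reg? r with
        | some (h, x) => pure (x, ← mkEqTrans pf h)
        | none => continue
      else
        let (val', pf'?) ← cleanValue cfg val
        match pf'? with
        | some pf' => pure (val', ← mkEqTrans pf pf')
        | none => pure (val', pf)
    hyps := hyps.push { userName := Name.mkSimple s!"w_{regName r}", type := ← mkEq (c.apply s) val, value := ← viaDef c pf }
  -- the register frame
  let keptTy := mkApp3 (mkConst ``RegsKept) S base s
  hyps := hyps.push { userName := `w_kept, type := keptTy, value := mkAppN (mkConst ``RegsKept.of_eq) #[S, base, nest, s, hkNest, hdef] }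
  -- memory: `v.mem` inside the raw value by what `w_mem` says
  let (memVal, memPf) ← do
    match ws.mem? with
    | some (h, M) =>
      let abs := abstractSyn memRaw vmem
      if abs.hasLooseBVars then
        let motive := mkLambda `m .default (mkConst ``Mem) abs
        pure (abs.instantiate1 M, ← mkEqTrans memPf (← mkCongrArg motive h))
      else
        pure (memRaw, memPf)
    | none => pure (memRaw, memPf)
  -- a store over the last store of the same range (the return address of a call in the slot of the previous one)
  let (memVal, memPf) ← do
    let top := memVal.consumeMData
    if top.isAppOfArity ``Mem.writeLE 4 then
      let below := (top.getArg! 0).consumeMData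
      if below.isAppOfArity ``Mem.writeLE 4 && below.getArg! 1 == top.getArg! 1 && below.getArg! 2 == top.getArg! 2 then
        let k := top.getArg! 2
        let bound ← mkDecideProof (← mkAppM ``LE.le #[k, mkNatLit (2 ^ 64)])
        let pf := mkAppN (mkConst ``Mem.writeLE_writeLE_same)
          #[below.getArg! 0, top.getArg! 1, k, below.getArg! 3, top.getArg! 3, bound]
        let newVal := mkApp4 (mkConst ``Mem.writeLE) (below.getArg! 0) (top.getArg! 1) k (top.getArg! 3)
        pure (newVal, ← mkEqTrans memPf pf)
      else
        pure (memVal, memPf)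
    else
      pure (memVal, memPf)
  let sMemPf ← viaDef .mem memPf
  hyps := hyps.push { userName := `w_mem, type := ← mkEq (Comp.mem.apply s) memVal, value := sMemPf }
  -- the code span
  if let some eqNest := eqNest? then
    let cmem := Comp.mem.apply cfg.codeState
    let eqTy := mkApp4 (mkConst ``Mem.EqOn) (mkNatLit cfg.lo) (mkNatLit cfg.hi) cmem (Comp.mem.apply s)
    let rawPf ← viaDef .mem (← proj .mem nest).2
    let pf ← mkAppOptM ``Mem.EqOn.of_mem_eq #[mkNatLit cfg.lo, mkNatLit cfg.hi, cmem, memRaw, Comp.mem.apply s, eqNest, rawPf]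
    hyps := hyps.push { userName := `w_eq, type := eqTy, value := pf }
  -- flags, MXCSR, the vector registers: only when something is known or was written
  for (c, old?, nm) in [(Comp.flags, ws.flags?, `w_flags), (Comp.mxcsr, ws.mxcsr?, `w_mxcsr), (Comp.zmm, ws.zmm?, `w_zmm)] do
    -- the vector registers are tracked only on request (a fact `v.zmm = …` in the context at the start of the walk):
    -- floating-point values are opaque in this proof, and the term grows by one `Vector.set` per SSE instruction
    if nm == `w_zmm && old?.isNone then continue
    -- A fact about `zmm` that is there WITHOUT a request is the one a check call states (`walkCheck`: `s_<addr>r.zmm = s_<addr>.zmm`).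
    -- It is carried while the vector registers are left alone (it stays one equation, and integer code may use it), and DROPPED
    -- at the first SSE write. Tracking it through the writes is what made one `u_walk` over an MDCT body endless: an SSE write is
    -- `zmm.set i (x &&& mask ||| zmm[i] &&& ~~~mask)`, the old value occurs twice, the term DOUBLES (as a tree) per instruction,
    -- 20+ of them between two checks (chk9 21 s, chk10 31 s, chk11 71 s, chk12 183 s of imdct_step3_iter0_loop, the whole body
    -- never: the time went into `u_clear_stale`'s tree walk, UserX/SseStep.lean, cured there too; what tracking still costs is a
    -- context of ≈ 1,900 printed lines per goal after one body).
    if nm == `w_zmm && !cfg.trackZmm && nestWritesVec nest then continue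
    let (val, pf) ← compFact c old?
    -- a flag result that defines all six status flags makes the one before irrelevant: the flags stay ONE layer deep
    let (val, pf) ← match c with
      | .flags => collapseFlags g val pf
      | _ => pure (val, pf)
    hyps := hyps.push { userName := nm, type := ← mkEq (c.apply s) val, value := ← viaDef c pf }
  -- the range facts of this step's STORES stay in the context (reading through the store later needs them)
  let mut storeIdx := 0
  let mut m := memRaw.consumeMData
  while m.isAppOfArity ``Mem.writeLE 4 do
    let a := m.getArg! 1
    let k := m.getArg! 2
    if let some h ← findHas cfg.layout a k extraHas then
      unless h.isFVar do
        let suffix := if storeIdx == 0 then "" else s!"_{storeIdx}"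
        hyps := hyps.push { userName := Name.mkSimple s!"w_has_{hex addr}{suffix}", type := ← inferType h, value := h }
    storeIdx := storeIdx + 1
    m := (m.getArg! 0).consumeMData
  let (_, g) ← bindHyps g hyps
  -- what is superseded
  let g ← g.tryClearMany (ws.own.push defId)
  let g ← g.tryClear v.fvarId!
  -- what nothing mentions any more: the values of undefined flags, the opaque values of SSE steps (an MXCSR value together
  -- with its mask fact), the states after earlier calls
  let mut g := g
  let decls := (← g.withContext getLCtx).foldl (init := #[]) fun acc d => acc.push d
  for d in decls.reverse do
    if d.isImplementationDetail || d.userName.hasMacroScopes then continue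
    let nm := d.userName.toString
    if nm.startsWith "hmx_" then
      -- the mask fact goes only together with its value
      let valueName := Name.mkSimple ("mx_" ++ String.ofList (nm.toList.drop 4))
      if let some v := (← g.withContext getLCtx).findFromUserName? valueName then
        let s0 ← saveState
        let g1 ← g.tryClear d.fvarId
        let g2 ← g1.tryClear v.fvarId
        if (← g2.withContext getLCtx).findFromUserName? valueName |>.isSome then
          s0.restore
        else
          g := g2
    else if ["fl_", "x_", "cmp_", "qr_", "s_"].any (fun pre => isWalkerName nm pre) then
      g ← g.tryClear d.fvarId
  return { goal := g, sides := sides }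

/-! ### Conditions -/

/-- Give the branch hypothesis `h` (a statement about `Cond.holds cc v.flags`) its meaning: the flags by what the context says,
then `cond_simp` and the bridge to numbers, computed with the flags BELOW the last producer abstracted (so that the cost does
not depend on how many flag-setting instructions the walk has seen). Returns the goal, or `none` if the hypothesis became
`False` (the goal is closed). -/
def normalizeCond (cfg : Cfg) (g : MVarId) (h : FVarId) (ws : WS) : TacticM (Option MVarId) := do
  let (g, h) ← match ws.flags? with
    | some (pf, F) => rewriteHyp g h (Comp.flags.apply ws.v) F pf
    | none => pure (g, h)
  g.withContext do
  let ty ← instantiateMVars (← h.getType)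
  -- the flags below the last producer, if they are more than a variable
  let outer? : Option Expr := ty.find? fun e => e.isAppOfArity ``Flags.setStatus 2
  let below? : Option Expr :=
    match outer? with
    | some st => if (st.getArg! 0).consumeMData.isFVar then none else some (st.getArg! 0)
    | none => none
  let (newTy, pf) ← match below? with
    | some below =>
      let abs := abstractSyn ty below
      withLocalDeclD `f (mkConst ``Flags) fun f => do
        let (r, _) ← simp (abs.instantiate1 f) cfg.condCtx cfg.condProcs
        let rpf ← r.getProof
        let tyLam ← mkLambdaFVars #[f] r.expr
        let pfLam ← mkLambdaFVars #[f] rpf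
        pure (tyLam.beta #[below], pfLam.beta #[below])
    | none =>
      let (r, _) ← simp ty cfg.condCtx cfg.condProcs
      pure (r.expr, ← r.getProof)
  if newTy == ty then
    return some g
  let rr ← g.replaceLocalDecl h newTy pf
  let g := rr.mvarId
  let h := rr.fvarId
  g.withContext do
  let ty ← instantiateMVars (← h.getType)
  if ty.isConstOf ``False then
    g.assign (← mkFalseElim (← g.getType) (mkFVar h))
    return none
  if ty.isConstOf ``True then
    return some (← g.tryClear h)
  return some g

/-! ### The walk -/

/-- The literal RIP of the state `v`, from the context. -/
def ripOf (ws : WS) : MetaM (Option Nat) := do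
  match ws.rip? with
  | some (_, val) => evalWord? val
  | none => return none

/-- Rename what the step introduced (`hc1`, `fv1`, `x1` …) after the address of the instruction; returns the goal and the branch
hypothesis, if there is one. -/
def nameStepHyps (g : MVarId) (addr : Nat) : MetaM (MVarId × Option FVarId) := do
  let mut g := g
  let mut br : Option FVarId := none
  let table : List (Name × String) :=
    [(`hc1, "hbr_"), (`fv1, "fl_"), (`x1, "x_"), (`hx1, "hx_"), (`hval1, "hval_"), (`bit1, "bit_"), (`hopt1, "hopt_"),
     (`qr1, "qr_"), (`mx1, "mx_"), (`hmx1, "hmx_"), (`cmp1, "cmp_")]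
  for d in ← g.withContext getLCtx do
    if d.isImplementationDetail then continue
    let base := d.userName.eraseMacroScopes
    for (old, pre) in table do
      if base == old then
        let mut nm := Name.mkSimple (pre ++ hex addr)
        if ((← g.withContext getLCtx).findFromUserName? nm).isSome then
          nm := Name.mkSimple (pre ++ hex addr ++ "b")
        g ← g.rename d.fvarId nm
        if old == `hc1 then
          br := some d.fvarId
  return (g, br)

/-- The `CheckSpec` hypothesis of the context for the routine at `entry`, if any: the proof and the arguments of its type. -/
def findCheck (entry : Nat) : MetaM (Option (Expr × Array Expr)) := do
  for d in ← getLCtx do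
    if d.isImplementationDetail then continue
    let ty0 := (← instantiateMVars d.type).cleanupAnnotations
    -- (an abbreviation of `CheckSpec` — `Asan.SmallCheck`, `Asan.RangeCheck` — is unfolded)
    let ty ← if ty0.isAppOfArity ``CheckSpec 8 then pure ty0 else
      match ty0.getAppFn.constName? with
      | some _ => do
        let t ← whnfR ty0
        pure t.cleanupAnnotations
      | none => pure ty0
    if ty.isAppOfArity ``CheckSpec 8 then
      if let some e ← evalWord? (ty.getArg! 7) then
        if e == entry then
          return some (d.toExpr, ty.getAppArgs)
  return none

/-- The `Calls` hypothesis (UserX/Contract.lean) of the context for the function at `entry`, if any: the proof and the arguments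
of its type `Calls L μ I K entry s`. -/
def findCalls (entry : Nat) : MetaM (Option (Expr × Array Expr)) := do
  for d in ← getLCtx do
    if d.isImplementationDetail then continue
    let ty := (← instantiateMVars d.type).cleanupAnnotations
    if ty.isAppOfArity ``Calls 6 then
      if let some e ← evalWord? (ty.getArg! 4) then
        if e == entry then
          return some (d.toExpr, ty.getAppArgs)
  return none

/-- The value of register `r` in the current state, with the proof of `v.reg r = value`: the walker's fact, or through the
register frame a fact about the base state. -/
def regValue (ws : WS) (r : Expr) : MetaM (Expr × Expr) := do
  let v := ws.v
  match ws.reg? r with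
  | some (h, x) => return (x, h)
  | none =>
    match ws.kept? with
    | some (hk, S, base) =>
      let some Sl := listLit? S | throwError "u_walk: the register list of the frame is not a literal"
      if Sl.contains r then
        let e := Comp.apply (.reg r) v
        return (e, ← mkEqRefl e)
      let test ← mkEqRefl (mkConst ``Bool.false)
      let pf := mkAppN (mkConst ``RegsKept.get) #[S, base, v, hk, r, test]
      let baseReg := Comp.apply (.reg r) base
      let mut out := (baseReg, pf)
      for d in ← getLCtx do
        if d.isImplementationDetail then continue
        let ty := (← instantiateMVars d.type).cleanupAnnotations
        if ty.isAppOfArity ``Eq 3 && (ty.getArg! 1).consumeMData == baseReg then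
          out := (ty.getArg! 2, ← mkEqTrans pf d.toExpr)
      return out
    | none =>
      let e := Comp.apply (.reg r) v
      return (e, ← mkEqRefl e)

/-- The return address a `call` has just pushed: the literal, and the proof of
`UInt64.ofNat (v.mem.readLE (v.reg .rsp) 8) = literal`; also the value of RSP and its proof. -/
def pushedReturn (cfg : Cfg) (g : MVarId) (ws : WS) (addr : Nat) : TacticM (Expr × Expr × Expr × Expr) := g.withContext do
  let v := ws.v
  let rsp := mkConst ``X86.Reg.rsp
  let (spVal, spPf) ← regValue ws rsp
  let (retNat, retPf0) ← resolveRead cfg g ws spVal (mkNatLit 8) #[]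
  let retWord0 ← mkAppM ``UInt64.ofNat #[retNat]
  let (retWord, retClean?) ← cleanValue cfg retWord0
  let some retLit ← evalWord? retWord
    | throwError "u_walk: the return address of the call at {hex addr}H is not a literal:{indentExpr retWord}"
  let retE := toExpr (UInt64.ofNat retLit)
  let vmem := Comp.mem.apply v
  let motiveA := mkLambda `a .default (mkConst ``UInt64) (mkApp3 (mkConst ``Mem.readLE) vmem (mkBVar 0) (mkNatLit 8))
  let step1 ← mkCongrArg motiveA spPf
  let readPf ← mkEqTrans step1 retPf0
  let ofNatPf ← mkCongrArg (mkConst ``UInt64.ofNat) readPf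
  let hretFull ← match retClean? with
    | some p => mkEqTrans ofNatPf p
    | none => pure ofNatPf
  return (retE, hretFull, spVal, spPf)

mutual

/-- At the entry of a function with the contract `hc : Calls L μ I K entry s` (UserX/Contract.lean): `Calls.use`. The goals
`AtEntry`'s fields (alignment, stack room, the image's code, the program's invariant) and the precondition come first — what
closes by the side tactic is closed; the walk STOPS after the return with the `Returned` state described by hypotheses:

      w_rip, w_rsp, w_kept (callee-saved registers kept), w_<r> for the registers that keep their facts,
      w_same : Mem.SameExcept (s.footprint v) v.mem s'.mem,   w_code : K.code.In s'.mem,   w_inv : K.inv s',   w_post : s.post v s'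

(`v` is the state at the callee's entry: it stays in the context with `w_mem_<addr> : v.mem = …`, `w_rsp_<addr>`, `w_rdi_<addr>` …,
`w_kept_<addr>`: what the footprint and the postcondition are about). -/
partial def walkCall (cfg : Cfg) (g : MVarId) (ws : WS) (hc : Expr) (hcArgs : Array Expr) (addr : Nat) :
    TacticM (List MVarId × List MVarId) := g.withContext do
  let v := ws.v
  let some (hrip, _) := ws.rip? | throwError "u_walk: no RIP"
  let L := hcArgs[0]!
  let μ := hcArgs[1]!
  let I := hcArgs[2]!
  let K := hcArgs[3]!
  let entry := hcArgs[4]!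
  let spec := hcArgs[5]!
  let (retE, hretFull, spVal, spPf) ← pushedReturn cfg g ws addr
  let rsp := mkConst ``X86.Reg.rsp
  let rspOfV := Comp.apply (.reg rsp) v
  let frame ← mkAppM ``Spec.frame #[spec]
  -- the fields of `AtEntry`, stated with the value of RSP
  let spNat ← mkAppM ``UInt64.toNat #[spVal]
  let alignTy ← mkEq (← mkAppM ``HMod.hMod #[spNat, mkNatLit 8]) (mkNatLit 0)
  let roomTy ← mkAppM ``LE.le #[← mkAppM ``HAdd.hAdd #[← mkAppM ``Conv.stackLo #[K], frame], spNat]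
  let topTy ← mkAppM ``LE.le #[← mkAppM ``HAdd.hAdd #[spNat, mkNatLit 8], ← mkAppM ``Conv.stackHi #[K]]
  let vmem := Comp.mem.apply v
  let codeTy ← mkAppM ``Code.In #[← mkAppM ``Conv.code #[K], vmem]
  let invTy := (mkApp (← mkAppM ``Conv.inv #[K]) v).headBeta
  let preTy := (mkApp (← mkAppM ``Spec.pre #[spec]) v).headBeta
  let alignG ← mkFreshExprSyntheticOpaqueMVar alignTy `call_align
  let roomG ← mkFreshExprSyntheticOpaqueMVar roomTy `call_room
  let topG ← mkFreshExprSyntheticOpaqueMVar topTy `call_top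
  let codeG ← mkFreshExprSyntheticOpaqueMVar codeTy `call_code
  let invG ← mkFreshExprSyntheticOpaqueMVar invTy `call_inv
  let preG ← mkFreshExprSyntheticOpaqueMVar preTy (Name.mkSimple s!"pre_{hex addr}")
  -- the facts about `v.reg .rsp` from those about its value
  let viaSp (mkTy : Expr → MetaM Expr) (pf : Expr) : MetaM Expr := do
    let motive ← withLocalDeclD `a (mkConst ``UInt64) fun x => do
      mkLambdaFVars #[x] (← mkTy x)
    mkEqMPR (← mkCongrArg motive spPf) pf
  let alignPf ← viaSp (fun x => do
    mkEq (← mkAppM ``HMod.hMod #[← mkAppM ``UInt64.toNat #[x], mkNatLit 8]) (mkNatLit 0)) alignG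
  let roomPf ← viaSp (fun x => do
    mkAppM ``LE.le #[← mkAppM ``HAdd.hAdd #[← mkAppM ``Conv.stackLo #[K], frame], ← mkAppM ``UInt64.toNat #[x]]) roomG
  let topPf ← viaSp (fun x => do
    mkAppM ``LE.le #[← mkAppM ``HAdd.hAdd #[← mkAppM ``UInt64.toNat #[x], mkNatLit 8], ← mkAppM ``Conv.stackHi #[K]]) topG
  let _ := rspOfV
  -- the return address is a literal: it is below 1 GB by evaluation (`AtEntry.ret_lt`)
  let ltPf ← mkDecideProof (← mkAppM ``LT.lt #[retE, toExpr (UInt64.ofNat 0x40000000)])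
  let atEntry ← mkAppOptM ``AtEntry.mk
    #[K, entry, frame, retE, v, hrip, hretFull, ltPf, alignPf, roomPf, topPf, codeG, invG]
  -- the continuation
  let t := (← instantiateMVars (← g.getType)).cleanupAnnotations
  let args := t.getAppArgs
  let contTy ← withLocalDeclD (Name.mkSimple s!"s_{hex addr}r") (mkConst ``X86.User.State) fun s1 => do
    let rt := mkAppN (mkConst ``Returned) #[K, spec, v, retE, s1]
    withLocalDeclD `w_ret rt fun hr => do
      mkForallFVars #[s1, hr] (mkAppN t.getAppFn (args.set! 3 s1))
  let contG ← mkFreshExprSyntheticOpaqueMVar contTy (← g.getTag)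
  let pf ← mkAppOptM ``Calls.use #[L, μ, I, K, entry, spec, args[4]!, hc, v, retE, atEntry, preG, contG]
  g.assign pf
  -- the returned state, described by hypotheses
  let (fs, g1) ← contG.mvarId!.introNP 2
  let s1 := mkFVar fs[0]!
  let hr := mkFVar fs[1]!
  let gNew ← g1.withContext do
    let mut hyps : Array Hypothesis := #[]
    let field (nm : Name) : MetaM Expr := mkProjection hr nm
    hyps := hyps.push { userName := `w_rip, type := ← mkEq (Comp.rip.apply s1) retE, value := ← field `rip }
    -- rsp: popped
    let rspRaw ← mkAppM ``HAdd.hAdd #[spVal, toExpr (UInt64.ofNat 8)]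
    let (rspVal, rspClean?) ← cleanValue cfg rspRaw
    let motiveAdd ← withLocalDeclD `a (mkConst ``UInt64) fun x => do
      mkLambdaFVars #[x] (← mkAppM ``HAdd.hAdd #[x, toExpr (UInt64.ofNat 8)])
    let rspPf ← mkEqTrans (← field `rsp) (← mkCongrArg motiveAdd spPf)
    let rspPf ← match rspClean? with
      | some p => mkEqTrans rspPf p
      | none => pure rspPf
    hyps := hyps.push { userName := `w_rsp, type := ← mkEq (Comp.apply (.reg rsp) s1) rspVal, value := rspPf }
    -- the frame and the callee-saved registers that have facts
    let (hk0, S0, base) ← match ws.kept? with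
      | some (h, S, b) => pure (h, S, b)
      | none => pure (mkApp2 (mkConst ``RegsKept.refl) (mkRegList #[]) v, mkRegList #[], v)
    let some S0list := listLit? S0 | throwError "u_walk: register list"
    let callerSavedE := mkConst ``callerSaved
    let some clobList := listLit? (← whnfD callerSavedE)
      | throwError "u_walk: `callerSaved` does not evaluate to a literal list"
    let mut Slist := S0list
    for r in clobList do
      unless Slist.contains r do
        Slist := Slist.push r
    let S := mkRegList Slist
    let test ← mkEqRefl (mkConst ``Bool.true)
    let k1 := mkAppN (mkConst ``RegsKept.mono_all) #[S0, S, base, v, hk0, test]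
    let k2 := mkAppN (mkConst ``RegsKept.mono_all) #[callerSavedE, S, v, s1, ← field `saved, test]
    let kept := mkAppN (mkConst ``RegsKept.trans) #[S, base, v, s1, k1, k2]
    hyps := hyps.push { userName := `w_kept, type := mkApp3 (mkConst ``RegsKept) S base s1, value := kept }
    for (r, h, x) in ws.regs do
      if clobList.contains r then continue
      let testF ← mkEqRefl (mkConst ``Bool.false)
      let get := mkAppN (mkConst ``RegsKept.get) #[callerSavedE, v, s1, ← field `saved, r, testF]
      hyps := hyps.push
        { userName := Name.mkSimple s!"w_{regName r}", type := ← mkEq (Comp.apply (.reg r) s1) x, value := ← mkEqTrans get h }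
    -- the footprint, the image's code, the invariant, the postcondition
    let samePf ← field `same
    hyps := hyps.push { userName := `w_same, type := ← inferType samePf, value := samePf }
    let codePf ← field `code
    hyps := hyps.push { userName := `w_code, type := ← inferType codePf, value := codePf }
    let invPf ← field `inv
    hyps := hyps.push { userName := `w_inv, type := (← inferType invPf).headBeta, value := invPf }
    let postPf ← field `post
    hyps := hyps.push { userName := `w_post, type := (← inferType postPf).headBeta, value := postPf }
    let (_, g2) ← bindHyps g1 hyps
    -- the facts about the state at the callee's entry STAY, renamed after the call site: the callee's footprint (`w_same`) and
    -- postcondition (`w_post`) are about that state's memory AND registers (its rsp, its argument registers):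
    -- `w_mem_<addr>`, `w_rsp_<addr>`, `w_rdi_<addr>` …, `w_kept_<addr>`, `w_zmm_<addr>`, `w_mxcsr_<addr>`; the rest (rip, flags) goes
    let mut g2 := g2
    let regFacts := ws.regs.filterMap fun (_, h, _) => if h.isFVar then some h.fvarId! else none
    let keptFact := match ws.kept? with
      | some (h, _, _) => if h.isFVar then some h.fvarId! else none
      | none => none
    for id in ws.own do
      let some d := (← g2.withContext getLCtx).find? id | continue
      if d.userName == `w_mem || d.userName == `w_zmm || d.userName == `w_mxcsr || regFacts.contains id || keptFact == some id then
        g2 ← g2.rename id (Name.mkSimple s!"{d.userName}_{hex addr}")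
      else
        g2 ← g2.tryClear id
    g2 ← g2.tryClear fs[1]!
    pure g2
  let mut sides : List MVarId := []
  for sg in [alignG.mvarId!, roomG.mvarId!, topG.mvarId!, codeG.mvarId!, invG.mvarId!] do
    if let some open_ ← dischargeSide cfg sg then
      sides := sides ++ [open_]
  sides := sides ++ [preG.mvarId!]
  return (sides, [gNew])

/-- At the entry of a sanitizer check routine with the contract `hc`: apply it. The goals `acc s.mem a` (the obligation) and any
side condition that does not close come first; the walk goes on after the return. -/
partial def walkCheck (cfg : Cfg) (g : MVarId) (ws : WS) (hc : Expr) (hcArgs : Array Expr) (addr : Nat) (fuel : Nat)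
    (path : List Nat) : TacticM (List MVarId × List MVarId) := g.withContext do
  let v := ws.v
  let clob := hcArgs[4]!
  let n := hcArgs[5]!
  let some clobList := listLit? clob
    | throwError "u_walk: the clobber list of the check contract is not a literal:{indentExpr clob}"
  let some (hrip, _) := ws.rip? | throwError "u_walk: no RIP"
  -- the argument, the stack pointer, and the return address the `call` has just pushed
  let rsp := mkConst ``X86.Reg.rsp
  let rdi := mkConst ``X86.Reg.rdi
  let (aVal, aPf) ← regValue ws rdi
  let (retE, hretFull, spVal, spPf) ← pushedReturn cfg g ws addr
  let vmem := Comp.mem.apply v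
  -- `L.Has (v.reg rsp) 8`
  let L := cfg.layout
  let hasSpG ← mkFreshExprSyntheticOpaqueMVar (mkApp3 (mkConst ``Layout.Has) L spVal (mkNatLit 8)) `side_has
  let motiveHas := mkLambda `a .default (mkConst ``UInt64) (mkApp3 (mkConst ``Layout.Has) L (mkBVar 0) (mkNatLit 8))
  let hasSp ← mkEqMPR (← mkCongrArg motiveHas spPf) hasSpG
  -- the code of the routine and the obligation
  let codeOK := hcArgs[3]!
  let acc := hcArgs[6]!
  let codeG ← mkFreshExprSyntheticOpaqueMVar (mkApp codeOK vmem).headBeta `side_checkcode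
  let accG ← mkFreshExprSyntheticOpaqueMVar (mkApp2 acc vmem aVal).headBeta (Name.mkSimple s!"check_{hex addr}")
  let ltPf ← mkDecideProof (← mkAppM ``LT.lt #[retE, toExpr (UInt64.ofNat 0x40000000)])
  -- the continuation
  let t := (← instantiateMVars (← g.getType)).cleanupAnnotations
  let args := t.getAppArgs
  let contTy ← withLocalDeclD (Name.mkSimple s!"s_{hex addr}r") (mkConst ``X86.User.State) fun s1 => do
    let ck := mkApp4 (mkConst ``Checked) clob v retE s1
    withLocalDeclD `w_ck ck fun hck => do
      mkForallFVars #[s1, hck] (mkAppN t.getAppFn (args.set! 3 s1))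
  let contG ← mkFreshExprSyntheticOpaqueMVar contTy (← g.getTag)
  let pf ← mkAppOptM ``CheckSpec.use
    #[L, none, none, none, none, none, none, none, none, hc, v, retE, aVal, hrip, codeG, hasSp, hretFull, ltPf, aPf, accG, contG]
  g.assign pf
  -- the state after the return, frozen
  let (fs, g1) ← contG.mvarId!.introNP 2
  let s1 := mkFVar fs[0]!
  let hck := mkFVar fs[1]!
  let (gNew, hasName) ← g1.withContext do
    let mut hyps : Array Hypothesis := #[]
    let field (nm : Name) : MetaM Expr := mkProjection hck nm
    hyps := hyps.push { userName := `w_rip, type := ← mkEq (Comp.rip.apply s1) retE, value := ← field `rip }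
    -- rsp: popped
    let rspRaw ← mkAppM ``HAdd.hAdd #[spVal, toExpr (UInt64.ofNat 8)]
    let (rspVal, rspClean?) ← cleanValue cfg rspRaw
    let motiveAdd ← withLocalDeclD `a (mkConst ``UInt64) fun x => do
      mkLambdaFVars #[x] (← mkAppM ``HAdd.hAdd #[x, toExpr (UInt64.ofNat 8)])
    let rspPf ← mkEqTrans (← field `rsp) (← mkCongrArg motiveAdd spPf)
    let rspPf ← match rspClean? with
      | some p => mkEqTrans rspPf p
      | none => pure rspPf
    hyps := hyps.push { userName := `w_rsp, type := ← mkEq (Comp.apply (.reg rsp) s1) rspVal, value := rspPf }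
    -- the frame and the registers that keep their facts
    let (hk0, S0, base) ← match ws.kept? with
      | some (h, S, b) => pure (h, S, b)
      | none => pure (mkApp2 (mkConst ``RegsKept.refl) (mkRegList #[]) v, mkRegList #[], v)
    let some S0list := listLit? S0 | throwError "u_walk: register list"
    let clobAll := #[rsp] ++ clobList
    let mut Slist := S0list
    for r in clobAll do
      unless Slist.contains r do
        Slist := Slist.push r
    let S := mkRegList Slist
    let test ← mkEqRefl (mkConst ``Bool.true)
    let k1 := mkAppN (mkConst ``RegsKept.mono_all) #[S0, S, base, v, hk0, test]
    let k2 := mkAppN (mkConst ``RegsKept.mono_all) #[mkRegList clobAll, S, v, s1, ← field `kept, test]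
    let kept := mkAppN (mkConst ``RegsKept.trans) #[S, base, v, s1, k1, k2]
    hyps := hyps.push { userName := `w_kept, type := mkApp3 (mkConst ``RegsKept) S base s1, value := kept }
    for (r, h, x) in ws.regs do
      if clobAll.contains r then continue
      let testF ← mkEqRefl (mkConst ``Bool.false)
      let get := mkAppN (mkConst ``RegsKept.get) #[mkRegList clobAll, v, s1, ← field `kept, r, testF]
      hyps := hyps.push
        { userName := Name.mkSimple s!"w_{regName r}", type := ← mkEq (Comp.apply (.reg r) s1) x, value := ← mkEqTrans get h }
    -- memory, code span, MXCSR, the vector registers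
    let memPf ← field `mem
    let (memVal, memFull) ← match ws.mem? with
      | some (h, M) => pure (M, ← mkEqTrans memPf h)
      | none => pure (vmem, memPf)
    hyps := hyps.push { userName := `w_mem, type := ← mkEq (Comp.mem.apply s1) memVal, value := memFull }
    if let some weq ← findCodeEq cfg ws then
      let cmem := Comp.mem.apply cfg.codeState
      let eqTy := mkApp4 (mkConst ``Mem.EqOn) (mkNatLit cfg.lo) (mkNatLit cfg.hi) cmem (Comp.mem.apply s1)
      let pf ← mkAppOptM ``Mem.EqOn.of_mem_eq #[mkNatLit cfg.lo, mkNatLit cfg.hi, cmem, vmem, Comp.mem.apply s1, weq, memPf]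
      hyps := hyps.push { userName := `w_eq, type := eqTy, value := pf }
    for (c, old?, nm, fld) in [(Comp.mxcsr, ws.mxcsr?, `w_mxcsr, `mxcsr), (Comp.zmm, ws.zmm?, `w_zmm, `zmm)] do
      let pf ← field fld
      match old? with
      | some (h, x) => hyps := hyps.push { userName := nm, type := ← mkEq (c.apply s1) x, value := ← mkEqTrans pf h }
      | none => hyps := hyps.push { userName := nm, type := ← mkEq (c.apply s1) (c.apply v), value := pf }
    -- the direction flag: a check keeps it (`Checked.df`); stated of the flags below the status results of the walk, and as
    -- `= false` / `= true` when the context says so of those flags (`he_df`, a loop invariant). The hypothesis is NOT one of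
    -- the walker's own (it is named after the call site and stays): the flags of the steps after the check are
    -- `s_<addr>r.flags.setStatus …`, and this is what is known of `s_<addr>r.flags`
    let dfPf0 ← field `df
    let dfTy0 := (← instantiateMVars (← inferType dfPf0)).cleanupAnnotations
    if dfTy0.isAppOfArity ``Eq 3 then
      let dfLhs := dfTy0.getArg! 1
      let vflags := Comp.flags.apply v
      let dfOf (F : Expr) : Expr := (dfTy0.getArg! 2).replace fun e => if e == vflags then some F else none
      let mut cur : Expr := vflags
      let mut dfPf := dfPf0
      -- the flags of the state at the routine's entry, as the walker knows them
      if let some (h, F) := ws.flags? then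
        let motive ← withLocalDeclD `f (mkConst ``X86.Flags) fun x => do
          mkLambdaFVars #[x] (dfOf x)
        dfPf ← mkEqTrans dfPf (← mkCongrArg motive h)
        cur := F
      -- through the status results
      let mut go := true
      while go do
        let c := cur.consumeMData
        if c.isAppOfArity ``X86.Flags.setStatus 2 then
          let inner := c.getArg! 0
          dfPf ← mkEqTrans dfPf (mkApp2 (mkConst ``X86.User.df_setStatus) inner (c.getArg! 1))
          cur := inner
        else
          go := false
      -- a fact of the context about the direction flag of those flags
      let mut dfRhs : Expr := dfOf cur
      for d in ← getLCtx do
        if d.isImplementationDetail then continue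
        let ty := (← instantiateMVars d.type).cleanupAnnotations
        if ty.isAppOfArity ``Eq 3 && (ty.getArg! 1).consumeMData == dfOf cur then
          dfPf ← mkEqTrans dfPf d.toExpr
          dfRhs := ty.getArg! 2
          break
      hyps := hyps.push
        { userName := Name.mkSimple s!"w_df_{hex addr}", type := ← mkEq dfLhs dfRhs, value := dfPf }
    -- the access that follows: inside the user region
    let hasName := Name.mkSimple s!"w_acc_{hex addr}"
    let hasPf := mkAppN (mkConst ``CheckSpec.has) (hcArgs ++ #[hc, vmem, aVal, accG])
    hyps := hyps.push { userName := hasName, type := mkApp3 (mkConst ``Layout.Has) L aVal n, value := hasPf }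
    let (_, g2) ← bindHyps g1 hyps
    let g2 ← g2.tryClearMany (ws.own.push fs[1]!)
    let g2 ← g2.tryClear v.fvarId!
    pure (g2, hasName)
  let _ := hasName
  -- side goals of the call itself
  let mut sides : List MVarId := []
  for sg in [hasSpG.mvarId!, codeG.mvarId!] do
    if let some open_ ← dischargeSide cfg sg then
      sides := sides ++ [open_]
  sides := sides ++ [accG.mvarId!]
  let (s, m) ← walkGoal cfg gNew false (fuel - 1) path
  return (sides ++ s, m)

/-- One goal: walk on if it is `ReachVia L μ I v P` at a literal RIP inside the function and not at a cut point. Returns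
(side goals, main goals). -/
partial def walkGoal (cfg : Cfg) (g : MVarId) (first : Bool) (fuel : Nat) (path : List Nat) :
    TacticM (List MVarId × List MVarId) := g.withContext do
  let t := (← instantiateMVars (← g.getType)).cleanupAnnotations
  unless t.isAppOfArity ``ReachVia 5 do
    return ([], [g])
  if fuel == 0 then
    logWarning "u_walk: out of fuel (a loop without a cut point?)"
    return ([], [g])
  let cur := (t.getArg! 3).consumeMData
  unless cur.isFVar do
    logWarning m!"u_walk: the state of the goal is not a variable:{indentExpr cur}"
    return ([], [g])
  let ws ← scanState cur
  let some rip ← ripOf ws | do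
    trace[u.walk] "stop: RIP is not a literal"
    return ([], [g])
  trace[u.walk] "at {hex rip}"
  if (← getOptions).getBool `trace.u.walk.time then
    IO.eprintln s!"[u.walk] at {hex rip}"
  if !first && cfg.cuts.contains rip then
    return ([], [g])
  if path.contains rip then
    logWarning m!"u_walk: back at {hex rip}H without a cut point; stopping there"
    return ([], [g])
  if rip < cfg.base || rip ≥ cfg.base + cfg.len then
    -- outside the function: a sanitizer check with a contract in the context, or the end of the walk
    if let some (hc, hcArgs) ← findCheck rip then
      return ← walkCheck cfg g ws hc hcArgs (path.headD rip) fuel path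
    if !first then
      if let some (hc, hcArgs) ← findCalls rip then
        return ← walkCall cfg g ws hc hcArgs (path.headD rip)
    return ([], [g])
  let some (hrip, ripVal) := ws.rip? | return ([], [g])
  let some weq ← findCodeEq cfg ws | do
    logWarning m!"u_walk: at {hex rip}H the context does not say that the code span [{hex cfg.lo}H, {hex cfg.hi}H) is as in the code hypothesis's memory (Mem.EqOn)"
    return ([], [g])
  let off := rip - cfg.base
  let (_, fact) ← try codeInsnAt cfg.codeName off catch e =>
    throwError "u_walk: the instruction at {hex rip}H does not decode: {e.toMessageData}"
  -- the invariant of the way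
  let I := t.getArg! 2
  -- (an invariant given by name, `NotReport`, is unfolded once)
  let invTy0 := (mkApp I cur).headBeta
  let invTy := match ← delta? invTy0 with
    | some e => e.headBeta
    | none => invTy0
  let invG ← mkFreshExprSyntheticOpaqueMVar invTy `inv
  let invG' ← rewriteTarget invG.mvarId! (Comp.rip.apply cur) ripVal hrip
  let invOk ← closes invG' (← `(tactic| first | decide | trivial | (with_reducible assumption)))
  unless invOk do
    trace[u.walk] "stop: the invariant of the way does not hold at {hex rip}"
    return ([], [g])
  -- the step
  let facts ← stepFacts
  let factStx ← facts.mapM fun e => do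
    let stx ← Term.exprToSyntax e
    `(Lean.Parser.Tactic.simpLemma| $stx:term)
  let simps := cfg.extra ++ factStx
  let L := cfg.layout
  let codeHere ← mkAppOptM ``HasCodeNat.of_eqOn
    #[L, cfg.codeState, cur, none, none, none, mkNatLit cfg.lo, mkNatLit cfg.hi, cfg.code, weq, cfg.hlo, cfg.hhi]
  let codeStx ← Term.exprToSyntax codeHere
  let invStx ← Term.exprToSyntax invG
  let hripStx ← Term.exprToSyntax hrip
  let factId := mkIdent fact
  let offStx := Syntax.mkNumLit (toString off)
  setGoals [g]
  try
    timed "refine" <| evalTactic (← `(tactic|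
      refine X86.User.ReachVia.step_code $invStx $codeStx $offStx (@$factId) (Eq.trans $hripStx (by decide)) (by decide)
        (by rfl) (by rfl) ?_))
    timed "u_body" (evalTactic (← `(tactic| u_body [$simps,*])))
  catch e =>
    throwError "u_walk: the step at {hex rip}H failed: {e.toMessageData}"
  let gs ← getGoals
  -- side goals first: their range facts serve the freeze of the goals that continue
  let mut sideGoals : Array MVarId := #[]
  let mut mainGoals : Array MVarId := #[]
  for g' in gs do
    let t' := (← instantiateMVars (← g'.getType)).cleanupAnnotations
    if t'.isAppOfArity ``ReachVia 5 then
      mainGoals := mainGoals.push g'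
    else
      sideGoals := sideGoals.push g'
  let mut extraHas : Array (Expr × Expr) := #[]
  let mut sides : List MVarId := []
  -- the range facts first: the other side goals (the target of a `ret`) are read through the stores with them
  let mut pending : Array MVarId := #[]
  for sg in sideGoals do
    let ty := (← instantiateMVars (← sg.getType)).cleanupAnnotations
    if ty.isAppOfArity ``Layout.Has 3 then
      let sg ← resolveTarget cfg sg ws #[]
      let ty := (← instantiateMVars (← sg.getType)).cleanupAnnotations
      trace[u.walk] "side goal: {ty}"
      extraHas := extraHas.push (ty, mkMVar sg)
      if let some open_ ← dischargeSide cfg sg then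
        sides := sides ++ [open_]
    else
      pending := pending.push sg
  for sg in pending do
    let sg ← timed "resolve side" (resolveTarget cfg sg ws extraHas)
    let ty := (← instantiateMVars (← sg.getType)).cleanupAnnotations
    trace[u.walk] "side goal: {ty}"
    if let some open_ ← dischargeSide cfg sg then
      sides := sides ++ [open_]
  let mut mains : List MVarId := []
  for g' in mainGoals do
    let (g', br?) ← nameStepHyps g' rip
    -- the condition of a branch, before the facts about the old state go
    let g'? ← match br? with
      | some br => timed "cond" (normalizeCond cfg g' br ws)
      | none => pure (some g')
    let some g' := g'? | continue
    if br?.isSome && cfg.prune then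
      if ← timed "prune" (closes g' (← `(tactic| (exfalso; u_omega_lin)))) then
        continue
    let fr ← timed "freeze" (freeze cfg g' ws extraHas rip)
    for sg in fr.sides do
      if let some open_ ← dischargeSide cfg sg then
        sides := sides ++ [open_]
    let (s, m) ← walkGoal cfg fr.goal false (fuel - 1) (rip :: path)
    sides := sides ++ s
    mains := mains ++ m
  return (sides, mains)

end

/-- The two simp sets of a walk: the meaning of conditions (`cond_simp` and the bridge to numbers), and the clean-up of values
(what was stored read back, addresses, literals). -/
def mkSimpSets : TacticM (MkSimpContextResult × MkSimpContextResult) := do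
  let condStx ← `(tactic| simp only [cond_simp, X86.Cond.lt_eq_decide_toNat, X86.Cond.le_eq_decide_toNat,
    X86.Cond.beq_eq_decide_toNat, X86.Cond.bne_eq_decide_toNat, X86.Cond.slt_eq_decide_toInt, X86.Cond.sle_eq_decide_toInt,
    decide_eq_true_eq, decide_eq_false_iff_not, Bool.not_eq_true, Bool.not_eq_false, Bool.not_eq_true', Bool.and_eq_true,
    Bool.or_eq_true, Decidable.not_not, Nat.not_lt, Nat.not_le, UInt64.toNat_toBitVec, BitVec.toNat_ofNat, Nat.reducePow,
    Nat.reduceMod, BitVec.reduceToNat, ne_eq, not_true_eq_false, not_false_eq_true, UserX.reduceToNatWord])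
  let condC ← mkSimpContext condStx (eraseLocal := false)
  let valStx ← `(tactic| simp only [X86.User.ofNat_toNat_mod_256_8, X86.User.toNat_mod_256_8, X86.User.ofNat_toNat_mod_lit,
    X86.User.toNat_mod_lit, X86.Word.ofBV_toBV64,
    Word.addrNorm, Word.addrNormSub, Nat.reducePow, Nat.reduceMod, UInt64.reduceOfNat, UInt64.ofNat_toNat])
  let valC ← mkSimpContext valStx (eraseLocal := false)
  return (condC, valC)

/-! ### The tactic -/

/-- `u_walk code [facts] until [cuts]`: see the file header. Options: `span [lo, hi]` the code span whose bytes no store of the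
walk may touch (default: the function itself); `side (tac)` the tactic for side conditions (default `u_omega`); `noprune`
do not try to close the arms of a branch by linear arithmetic. -/
syntax "u_walk " term:max (" [" Lean.Parser.Tactic.simpLemma,* "]")? (" until " "[" term,* "]")?
  (" span " "[" term "," term "]")? (" side " "(" tacticSeq ")")? (" noprune")? : tactic

/-- An address given to `u_walk` (`until […]`, `span […]`): a numeral, or a CLOSED term of type `Nat` or `Word` that evaluates —
a symbolic label (`Vorbis.L.memset.loop1`, Vorbis/Labels.lean), so that a proof names no raw address. -/
def evalAddr (stx : Syntax) : TacticM Nat := do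
  if let some n := stx.isNatLit? then
    return n
  let e ← instantiateMVars (← Lean.Elab.Term.elabTerm stx none |>.run')
  let ty ← whnfR (← inferType e)
  if ty.isConstOf ``Nat then
    if e.hasFVar || e.hasMVar then
      throwErrorAt stx "u_walk: the address is not a closed term:{indentExpr e}"
    try
      return ← unsafe evalExpr Nat (Lean.mkConst ``Nat) e
    catch _ =>
      throwErrorAt stx "u_walk: the address does not evaluate:{indentExpr e}"
  match ← evalWord? e with
  | some n => return n
  | none => throwErrorAt stx "u_walk: the address is not a closed term of type Nat or Word:{indentExpr e}"

/-- A RIP given by a LABEL (`he_rip : u.rip = Vorbis.L.memset.entry`, a closed term that is not a numeral) is restated as a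
numeral: `w_rip : u.rip = 0x101520` is added (`Eq.trans he_rip (by decide)`), so that every address the walk computes from it
is a numeral again. -/
def literalRip (g : MVarId) : TacticM MVarId := g.withContext do
  let t := (← instantiateMVars (← g.getType)).cleanupAnnotations
  unless t.isAppOfArity ``ReachVia 5 do
    return g
  let cur := (t.getArg! 3).consumeMData
  unless cur.isFVar do
    return g
  let ws ← scanState cur
  let some (h, val) := ws.rip? | return g
  let val' := val.consumeMData
  let isNumeral := val'.isAppOfArity ``OfNat.ofNat 3 && (val'.getArg! 1).isRawNatLit
  if isNumeral then
    return g
  let some n ← evalWord? val | return g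
  let lit := toExpr (UInt64.ofNat n)
  let eqPf ← mkDecideProof (← mkEq val lit)
  let pf ← mkEqTrans h eqPf
  let (_, g') ← (← g.assert `w_rip (← mkEq (Comp.rip.apply cur) lit) pf).intro1P
  -- the label form goes: a step would rewrite with either, and the addresses computed from the label are not numerals
  if h.isFVar then
    return ← g'.tryClear h.fvarId!
  return g'

elab_rules : tactic
  | `(tactic| u_walk $code $[[$simps,*]]? $[until [$stops,*]]? $[span [$lo?, $hi?]]? $[side ($sideTac?)]? $[noprune%$np]?) =>
    withMainContext do
    let g0 ← literalRip (← getMainGoal)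
    setGoals (g0 :: (← getGoals).drop 1)
    withMainContext do
    let g ← getMainGoal
    let rest := (← getGoals).drop 1
    let codeE ← instantiateMVars (← Lean.Elab.Term.elabTerm code none |>.run')
    let cty ← whnfR (← instantiateMVars (← inferType codeE))
    unless cty.isAppOfArity ``HasCodeNat 5 do
      throwError "u_walk: the first argument must be a proof of `HasCodeNat L c base N len`, not{indentExpr cty}"
    let L := cty.getArg! 0
    let codeState := cty.getArg! 1
    let baseE := cty.getArg! 2
    let NE := cty.getArg! 3
    let lenE := cty.getArg! 4
    let some base ← evalWord? baseE | throwError "u_walk: the base address of the code is not a literal:{indentExpr baseE}"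
    let len ← match natOf? lenE with
      | some n => pure n
      | none =>
        -- (a label: `Vorbis.L.memset.size`)
        if lenE.hasFVar || lenE.hasMVar then
          throwError "u_walk: the length of the code is not a closed term:{indentExpr lenE}"
        try
          unsafe evalExpr Nat (Lean.mkConst ``Nat) lenE
        catch _ =>
          throwError "u_walk: the length of the code does not evaluate:{indentExpr lenE}"
    let codeName ← match NE.constName? with
      | some (.str n "nat") => pure n
      | _ => throwError "u_walk: the code is not the number of a `#code_bytes` definition:{indentExpr NE}"
    let (lo, hi) ← match lo?, hi? with
      | some l, some h => pure (← evalAddr l, ← evalAddr h)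
      | _, _ => pure (base, base + len)
    let cutList ← match stops with
      | some ss => ss.getElems.toList.mapM (fun (x : TSyntax `term) => evalAddr x.raw)
      | none => pure []
    let baseNat ← mkAppM ``UInt64.toNat #[baseE]
    let hlo ← mkDecideProof (← mkAppM ``LE.le #[mkNatLit lo, baseNat])
    let hhi ← mkDecideProof (← mkAppM ``LE.le #[← mkAppM ``HAdd.hAdd #[baseNat, lenE], mkNatLit hi])
    let sideTac : Syntax ← match sideTac? with
      | some t => pure t.raw
      | none => pure (← `(tactic| u_omega)).raw
    let (condC, valC) ← mkSimpSets
    -- the vector registers are tracked iff the context says something of them NOW (see `Cfg.trackZmm`)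
    let goalTy := (← instantiateMVars (← g.getType)).cleanupAnnotations
    let mut trackZmm := false
    if goalTy.isAppOfArity ``ReachVia 5 then
      let startState := (goalTy.getArg! 3).consumeMData
      if startState.isFVar then
        trackZmm := (← scanState startState).zmm?.isSome
    let cfg : Cfg :=
      { code := codeE, codeState := codeState, layout := L, codeName := codeName, base := base, len := len, lo := lo, hi := hi
        hlo := hlo, hhi := hhi, trackZmm := trackZmm
        extra := match simps with
          | some s => s.getElems
          | none => #[]
        cuts := cutList
        sideTac := sideTac, prune := np.isNone
        condCtx := condC.ctx, condProcs := condC.simprocs, valCtx := valC.ctx, valProcs := valC.simprocs }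
    let (sides, mains) ← walkGoal cfg g true 4000 []
    if (← getOptions).getBool `trace.u.walk.time then
      let t0 ← IO.monoMsNow
      let e ← instantiateMVars (mkMVar g)
      let t1 ← IO.monoMsNow
      IO.eprintln s!"[u.walk.time] proof term: {← e.numObjs} objects, instantiated in {t1 - t0} ms"
    setGoals (sides ++ mains ++ rest)

/-- `u_resolve`: every load `x.mem.readLE a k` of the goal, `x` a state variable whose memory the context gives as a nest of
stores (`w_mem : x.mem = M`, the walker's hypothesis), is read through the stores exactly as a walk does it; the value is
cleaned up (`UInt64.ofNat (y.toNat % 256 ^ 8)` is `y`); the goal is closed if it became an instance of `rfl` or a hypothesis.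
For the stack-slot facts of a loop invariant: `have : UInt64.ofNat (s.mem.readLE (sp - 8) 8) = u.reg .r14 := by u_resolve`. -/
elab "u_resolve" : tactic => withMainContext do
  let g ← getMainGoal
  let rest := (← getGoals).drop 1
  -- the layout: from any range fact of the context
  let mut layout? : Option Expr := none
  for d in ← getLCtx do
    let ty := (← instantiateMVars d.type).cleanupAnnotations
    if ty.isAppOfArity ``Layout.Has 3 then
      layout? := some (ty.getArg! 0)
    else if (← whnfR ty).isConstOf ``X86.User.Layout then
      layout? := some d.toExpr
  let some L := layout? | throwError "u_resolve: no layout in the context"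
  let (condC, valC) ← mkSimpSets
  let cfg : Cfg :=
    { code := L, codeState := L, layout := L, codeName := `none, base := 0, len := 0, lo := 0, hi := 0, hlo := L, hhi := L
      extra := #[], cuts := [], sideTac := (← `(tactic| u_omega)).raw, prune := false
      condCtx := condC.ctx, condProcs := condC.simprocs, valCtx := valC.ctx, valProcs := valC.simprocs }
  -- every state variable with a memory fact
  let mut g := g
  let t ← instantiateMVars (← g.getType)
  let mut states : Array Expr := #[]
  for d in ← getLCtx do
    if (← whnfR (← instantiateMVars d.type)).isConstOf ``X86.User.State then
      states := states.push d.toExpr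
  for x in states do
    let ws ← g.withContext (scanState x)
    if ws.mem?.isNone then continue
    for rd in readsOf x t do
      let (val, pf) ← resolveRead cfg g ws (rd.getArg! 1) (rd.getArg! 2) #[]
      if val == rd then continue
      g ← rewriteTarget g rd val pf
  -- clean up, close
  let t ← instantiateMVars (← g.getType)
  let (r, _) ← simp t cfg.valCtx cfg.valProcs
  if r.expr != t then
    g ← g.replaceTargetEq r.expr (← r.getProof)
  setGoals [g]
  evalTactic (← `(tactic| try (first | (exact True.intro) | (with_reducible rfl) | (with_reducible assumption))))
  setGoals ((← getUnsolvedGoals) ++ rest)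

end UserX.Walk
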